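/- GENERATED by mk_final_copies.py from the proof of the farm's unit `decode_residue.9` (farm:decode_residue.9.1: Lemmas.lean) as the
   re-elaboration sweep compiled it — do not edit. -/
import Asan.CheckWalk
import Vorbis.Spec.Units.decode_residue_9
open X86 X86.User Asan Vorbis Vorbis.Spec Vorbis.Spec.DecodeResidue

set_option maxRecDepth 4000
set_option maxHeartbeats 4000000

namespace Vorbis.Spec.decode_residue_9

/-- 0x10f809 `lea rdi,[r12+0x6e8]`: DECODE(temp,f,c) begins, `r13 = c` (C line 2265). A proposed cut point. -/
abbrev pDec : Word := 0x10f809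
/-- 0x10f825 `lea rdi,[r12+0x6e4]`: the join after the optional `prep_huffman(f)` (C line 2265). A proposed cut point. -/
abbrev pAcc : Word := 0x10f825
/-- 0x10f70a `lea rdi,[r13+0x1b]`: the three-way join of DECODE_RAW, `ebx` = the raw result (C line 2265). A proposed cut point. -/
abbrev pRaw : Word := 0x10f70a
/-- 0x10f73e `cmp ebx,-1`: the join after the `sparse` translation, `ebx = temp` (C line 2266). A proposed cut point. -/
abbrev pTemp : Word := 0x10f73e

/-- The class book `c = f->codebooks + r->classbook` of this activation, read in the entry memory. -/
def clsBook (g : G) : Nat := Residue.cbk g.e.mem g.f g.r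

/-- **What every point of the j-loop 2261 shares** (the fields of `At28` without `rip` and with `j` exposed): COMMON, path B's
slots, `r12 = f`, `r15d = j`, `[rbp−0xc8] = r`, `[rbp−0xdc] = 0`, `[rbp−0xf0] = pcount`, WB with `pcount < part_read`, and the
rows `j' < j` that matter filled up to `class_set + 1`. -/
structure LoopCore (u₀ : State) (g : G) (cs pcount j : Nat) (v : State) : Prop where
  common : Common u₀ g v
  path : PathB g cs v
  r12 : v.reg .r12 = g.e.reg .rdi
  r15 : v.reg .r15 = UInt64.ofNat j
  sl_r : v.mem.readLE (g.e.reg .rsp - 208) 8 = g.r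
  sl_pass : v.mem.readLE (g.e.reg .rsp - 228) 4 = 0
  sl_pcount : v.mem.readLE (g.e.reg .rsp - 248) 4 = pcount
  wb : WInv v.mem g.f g.r g.TB g.C g.PRD g.W g.rowsB 0 cs pcount
  lt : pcount < g.PRD
  fill : ∀ j', j' < j → g.rowsB j' → Fill v.mem g.f g.r g.TB g.C g.PRD j' (cs + 1)

/-- **Inside the body of the j-loop 2261, for a channel that is decoded**: `LoopCore`, `j < ch`, `do_not_decode[j] = 0`,
`[rbp−0xb8] = j` (8 bytes, sign-extended), `r13 = c`. -/
structure LoopBody (u₀ : State) (g : G) (cs pcount j : Nat) (v : State) : Prop where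
  core : LoopCore u₀ g cs pcount j v
  j_lt : j < g.ch
  row : g.rowsB j
  sl_j : v.mem.readLE (g.e.reg .rsp - 192) 8 = j
  r13 : v.reg .r13 = UInt64.ofNat (clsBook g)

/-- The assertion at `pDec` (0x10f809). -/
structure AtDec (u₀ : State) (g : G) (cs pcount j : Nat) (v : State) : Prop where
  rip : v.rip = pDec
  body : LoopBody u₀ g cs pcount j v

/-- The assertion at `pAcc` (0x10f825). -/
structure AtAcc (u₀ : State) (g : G) (cs pcount j : Nat) (v : State) : Prop where
  rip : v.rip = pAcc
  body : LoopBody u₀ g cs pcount j v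

/-- The assertion at `pRaw` (0x10f70a): `ebx` is a DECODE_RAW result of the class book (whose header reads in every memory of
the activation as in the entry memory: `cb_fields`). -/
structure AtRaw (u₀ : State) (g : G) (cs pcount j : Nat) (v : State) : Prop where
  rip : v.rip = pRaw
  body : LoopBody u₀ g cs pcount j v
  res : DecodeRawResult g.e.mem (clsBook g) (argInt (v.reg .rbx))

/-- The assertion at `pTemp` (0x10f73e): `ebx` is a DECODE result of the class book (`−1` or an index of `classdata`). -/
structure AtTemp (u₀ : State) (g : G) (cs pcount j : Nat) (v : State) : Prop where
  rip : v.rip = pTemp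
  body : LoopBody u₀ g cs pcount j v
  res : DecodeResult g.e.mem (clsBook g) (argInt (v.reg .rbx))

/-- `At28` from `LoopCore` (the head of the loop with the counter `j`). -/
theorem at28_of_core {u₀ : State} {g : G} {cs pcount j : Nat} {v : State} (hrip : v.rip = L.decode_residue.cut28)
    (h : LoopCore u₀ g cs pcount j v) (hj : j ≤ g.ch) : At28 u₀ g cs pcount v :=
  ⟨hrip, h.common, h.path, h.r12, h.sl_r, h.sl_pass, h.sl_pcount, h.wb, h.lt, j, hj, h.r15, h.fill⟩

/-- The scratch part of the own stack frame that the body of the j-loop 2261 stores to: everything below the steady stack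
pointer (return addresses of the check calls, the callees' frames), the spill `[rbp−0xb8]` (8 bytes) and the spill
`[rbp−0xd8]` (4 bytes). -/
def scratch (g : G) : List Span :=
  [⟨g.RA - 848, g.RA - 248⟩, ⟨g.RA - 192, g.RA - 184⟩, ⟨g.RA - 224, g.RA - 220⟩]

/-- Where the decoder object is: in the data space and off the stack region. -/
theorem where_f {u₀ : State} {g : G} (hent : Entered u₀ g) :
    0x100000 ≤ g.f ∧ g.f + 1808 ≤ 0xC00000 ∧ (g.f + 1808 ≤ 0x700000 ∨ 0x800000 ≤ g.f) := by
  have hob : g.Blk (objBlock g.f) := hent.pre.vorbis.obj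
  have hobin := hent.pre.env.ok.inside _ hob
  have hobst := hent.pre.free.offStack _ hob
  simp only [vblock, voff] at hobin hobst
  omega

/-- Where the temp block is: inside the arena's free part, hence in the data space and off the stack region. -/
theorem where_tb {u₀ : State} {g : G} {v : State} (c : Common u₀ g v) :
    0x100000 ≤ g.TB.base ∧ g.TB.base + g.TB.size ≤ 0xC00000 ∧ (g.TB.base + g.TB.size ≤ 0x700000 ∨ 0x800000 ≤ g.TB.base) := by
  have hb : ADOBusy g.A' g.others' v.mem g.f g.sz := c.point.busy
  have hr := hb.ok.tblock_range c.tblock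
  have h1 := hb.ok.AR1
  have h1x := hb.ok.AR1x
  have h2 := hb.ok.AR2
  have hle := le_r8 g.TB.size
  have eB : g.A'.B = g.A.B := rfl
  have eL : g.A'.L = g.A.L := rfl
  rw [eB, eL] at h1 h1x hr
  omega

/-- **COMMON over stores into the scratch part of the own frame** (every block of the loop body pushes return addresses of
check calls below the stack pointer and spills into `[rbp−0xb8]`, `[rbp−0xd8]`): everything else reads the same. -/
theorem common_scratch {u₀ : State} {g : G} (hent : Entered u₀ g) {v v' : State} (c : Common u₀ g v)
    (hrbp : v'.reg .rbp = g.e.reg .rsp - 8) (hrsp : v'.reg .rsp = g.e.reg .rsp - 248)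
    (code : CodeOK u₀ v'.mem) (inv : abiInv v')
    (hs : Mem.SameExcept (scratch g) v.mem v'.mem) : Common u₀ g v' := by
  have hroom := hent.room
  have hwf := where_f hent
  have hwt := where_tb c
  have eR : (g.e.reg .rsp).toNat = g.RA := rfl
  -- a read off the scratch spans is unchanged
  have rd : ∀ (k n : Nat), k ≤ 248 → n ≤ k →
      (k + 0 ≤ 184 ∨ (192 ≤ k - n + 0 ∧ k ≤ 220) ∨ 224 ≤ k - n + 0) →
      v'.mem.readLE (g.e.reg .rsp - UInt64.ofNat k) n = v.mem.readLE (g.e.reg .rsp - UInt64.ofNat k) n := by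
    intro k n hk hn hd
    have ea : (g.e.reg .rsp - UInt64.ofNat k).toNat = g.RA - k := by
      rw [UInt64.toNat_sub_of_le _ _ (by rw [UInt64.le_iff_toNat_le, UInt64.toNat_ofNat']; omega), UInt64.toNat_ofNat']
      omega
    apply hs.readLE _ _ (by omega)
    intro w hw
    simp only [scratch, List.mem_cons, List.mem_nil_iff, or_false] at hw
    rcases hw with rfl | rfl | rfl <;> simp only [] <;> omega
  -- no span of the scratch part meets an object outside the stack region
  have off : ∀ lo hi : Nat, (hi ≤ 0x700000 ∨ 0x800000 ≤ lo) → ∀ w, w ∈ scratch g → hi ≤ w.lo ∨ w.hi ≤ lo := by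
    intro lo hi hlh w hw
    simp only [scratch, List.mem_cons, List.mem_nil_iff, or_false] at hw
    rcases hw with rfl | rfl | rfl <;> simp only [] <;> omega
  have hun : ShadowUntouched v.mem v'.mem := hs.eqOn 0xC00000 0xE00000 (off _ _ (by omega))
  have hobj : ObjSame g.f v.mem v'.mem := by
    apply ObjSame.of_sameExcept hs (by simp only [voff]; omega)
    intro w hw
    have := off g.f (g.f + 1808) (by omega) w hw
    omega
  have hbits : Bits g.Blk g.len v'.mem g.f := c.point.vorbis.bits.frame hobj
  have hmu : mu v'.mem g.f = mu v.mem g.f := mu_transfer (hobj.sub (by decide))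
  have hado : ObjEq ADO.wins v.mem g.f v'.mem g.f := by
    apply ObjEq.of_sameExcept hs
    · intro w hw
      simp only [ADO.wins, List.mem_cons, List.mem_nil_iff, or_false] at hw
      rcases hw with rfl | rfl <;> simp only [] <;> omega
    · intro w hw s hsp
      simp only [ADO.wins, List.mem_cons, List.mem_nil_iff, or_false] at hw
      have := off g.f (g.f + 1808) (by omega) s hsp
      rcases hw with rfl | rfl <;> simp only [] <;> omega
  have hbusy : ADOBusy g.A' g.others' v'.mem g.f g.sz := (show ADOBusy g.A' g.others' v.mem g.f g.sz from c.point.busy).transfer hado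
  have htb : TempRows v'.mem g.TB g.C g.PRD := by
    apply c.tb.frame
    apply Block.Kept.of_sameExcept hs
    · intro w hw
      have hsz := c.tb.size
      have h3 : g.C * (8 + 8 * g.PRD) = g.C * 8 + g.C * (8 * g.PRD) := Nat.mul_add _ _ _
      have := off g.TB.base (g.TB.base + 8 * g.C) (by omega) w hw
      simp only []
      omega
    · have hsz := c.tb.size
      have h3 : g.C * (8 + 8 * g.PRD) = g.C * 8 + g.C * (8 * g.PRD) := Nat.mul_add _ _ _
      simp only []
      omega
  have hsame : Mem.SameExcept (g.spec.footprint g.e) g.e.mem v'.mem := by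
    apply c.same.step_same hs
    intro w hw a h1 h2
    refine ⟨⟨g.RA - 848, g.RA⟩, ?_, ?_⟩
    · unfold Spec.footprint
      exact List.mem_cons_self
    · simp only [scratch, List.mem_cons, List.mem_nil_iff, or_false] at hw
      rcases hw with rfl | rfl | rfl <;> simp only [] at h1 h2 ⊢ <;> omega
  refine Common.of_frame hent hrbp hrsp code inv ?_ ?_ ?_ ?_ ?_ ?_ ?_ ?_ ?_ ?_ ?_ ?_ ?_ ?_ hsame (c.shadow.untouched hun) hbits hbusy htb ?_
  · rw [show v'.mem.readLE (g.e.reg .rsp - 8) 8 = v.mem.readLE (g.e.reg .rsp - 8) 8 from rd 8 8 (by omega) (by omega) (by omega)]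
    exact c.s_rbp
  · rw [show v'.mem.readLE (g.e.reg .rsp - 16) 8 = v.mem.readLE (g.e.reg .rsp - 16) 8 from rd 16 8 (by omega) (by omega) (by omega)]
    exact c.s_r15
  · rw [show v'.mem.readLE (g.e.reg .rsp - 24) 8 = v.mem.readLE (g.e.reg .rsp - 24) 8 from rd 24 8 (by omega) (by omega) (by omega)]
    exact c.s_r14
  · rw [show v'.mem.readLE (g.e.reg .rsp - 32) 8 = v.mem.readLE (g.e.reg .rsp - 32) 8 from rd 32 8 (by omega) (by omega) (by omega)]
    exact c.s_r13
  · rw [show v'.mem.readLE (g.e.reg .rsp - 40) 8 = v.mem.readLE (g.e.reg .rsp - 40) 8 from rd 40 8 (by omega) (by omega) (by omega)]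
    exact c.s_r12
  · rw [show v'.mem.readLE (g.e.reg .rsp - 48) 8 = v.mem.readLE (g.e.reg .rsp - 48) 8 from rd 48 8 (by omega) (by omega) (by omega)]
    exact c.s_rbx
  · rw [show v'.mem.readLE (g.e.reg .rsp - 184) 8 = v.mem.readLE (g.e.reg .rsp - 184) 8 from rd 184 8 (by omega) (by omega) (by omega)]
    exact c.fr_f
  · rw [show v'.mem.readLE (g.e.reg .rsp - 216) 8 = v.mem.readLE (g.e.reg .rsp - 216) 8 from rd 216 8 (by omega) (by omega) (by omega)]
    exact c.fr_rb
  · rw [show v'.mem.readLE (g.e.reg .rsp - 156) 4 = v.mem.readLE (g.e.reg .rsp - 156) 4 from rd 156 4 (by omega) (by omega) (by omega)]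
    exact c.fr_ch
  · rw [show v'.mem.readLE (g.e.reg .rsp - 196) 4 = v.mem.readLE (g.e.reg .rsp - 196) 4 from rd 196 4 (by omega) (by omega) (by omega)]
    exact c.fr_prd
  · rw [show v'.mem.readLE (g.e.reg .rsp - 200) 4 = v.mem.readLE (g.e.reg .rsp - 200) 4 from rd 200 4 (by omega) (by omega) (by omega)]
    exact c.fr_w
  · rw [show v'.mem.readLE (g.e.reg .rsp - 232) 4 = v.mem.readLE (g.e.reg .rsp - 232) 4 from rd 232 4 (by omega) (by omega) (by omega)]
    exact c.fr_rtype
  · rw [show v'.mem.readLE (g.e.reg .rsp - 176) 8 = v.mem.readLE (g.e.reg .rsp - 176) 8 from rd 176 8 (by omega) (by omega) (by omega)]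
    exact c.fr_pcd
  · rw [show v'.mem.readLE (g.e.reg .rsp - 240) 8 = v.mem.readLE (g.e.reg .rsp - 240) 8 from rd 240 8 (by omega) (by omega) (by omega)]
    exact c.fr_si
  · rw [hmu]
    exact c.mu_le

/-- A read of the own frame off the scratch spans is unchanged (`k` = the distance below the entry stack pointer). -/
theorem scratch_read {u₀ : State} {g : G} (hent : Entered u₀ g) {m m' : Mem} (hs : Mem.SameExcept (scratch g) m m')
    (k n : Nat) (hk : k ≤ 248) (hn : n ≤ k) (hd : k + 0 ≤ 184 ∨ (192 ≤ k - n + 0 ∧ k ≤ 220) ∨ 224 ≤ k - n + 0) :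
    m'.readLE (g.e.reg .rsp - UInt64.ofNat k) n = m.readLE (g.e.reg .rsp - UInt64.ofNat k) n := by
  have hroom := hent.room
  have eR : (g.e.reg .rsp).toNat = g.RA := rfl
  have ea : (g.e.reg .rsp - UInt64.ofNat k).toNat = g.RA - k := by
    rw [UInt64.toNat_sub_of_le _ _ (by rw [UInt64.le_iff_toNat_le, UInt64.toNat_ofNat']; omega), UInt64.toNat_ofNat']
    omega
  apply hs.readLE _ _ (by omega)
  intro w hw
  simp only [scratch, List.mem_cons, List.mem_nil_iff, or_false] at hw
  rcases hw with rfl | rfl | rfl <;> simp only [] <;> omega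

/-- No span of the scratch part meets a range outside the stack region. -/
theorem scratch_off {u₀ : State} {g : G} (hent : Entered u₀ g) (lo hi : Nat) (h : hi ≤ 0x700000 ∨ 0x800000 ≤ lo) :
    ∀ w, w ∈ scratch g → hi ≤ w.lo ∨ w.hi ≤ lo := by
  have hroom := hent.room
  intro w hw
  simp only [scratch, List.mem_cons, List.mem_nil_iff, or_false] at hw
  rcases hw with rfl | rfl | rfl <;> simp only [] <;> omega

/-- The reads of the residue record are the same in two memories that both read as the entry memory. -/
theorem reads_between {u₀ : State} {g : G} {v v' : State} (c : Common u₀ g v) (c' : Common u₀ g v') :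
    ResidueReads v.mem g.f v'.mem g.f g.r :=
  ⟨c'.reads.begin.trans c.reads.begin.symm, c'.reads.end_.trans c.reads.end_.symm,
   c'.reads.part_size.trans c.reads.part_size.symm, c'.reads.classifications.trans c.reads.classifications.symm,
   c'.reads.classbook.trans c.reads.classbook.symm, c'.reads.classdata.trans c.reads.classdata.symm,
   c'.reads.residue_books.trans c.reads.residue_books.symm, c'.reads.codebook_count.trans c.reads.codebook_count.symm,
   c'.reads.cbk.trans c.reads.cbk.symm, c'.reads.E.trans c.reads.E.symm, c'.reads.W.trans c.reads.W.symm⟩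

/-- **FILL over stores into the scratch part of the own frame**: the temp block and the `classdata` table are off the stack. -/
theorem fill_scratch {u₀ : State} {g : G} (hent : Entered u₀ g) {v v' : State} (c : Common u₀ g v) (c' : Common u₀ g v')
    (hs : Mem.SameExcept (scratch g) v.mem v'.mem) {j m : Nat} (hj : j < g.C) (hm : m ≤ g.PRD)
    (h : Fill v.mem g.f g.r g.TB g.C g.PRD j m) : Fill v'.mem g.f g.r g.TB g.C g.PRD j m := by
  have hwt := where_tb c
  apply h.frame hj hm c.tb.size
  · apply Block.Kept.of_sameExcept hs
    · exact scratch_off hent _ _ (by omega)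
    · omega
  · exact reads_between c c'
  · have hB : g.Blk ⟨Residue.classdata v.mem g.r, 8 * Residue.E v.mem g.f g.r⟩ := (c.resAt hent).R8a
    have hin := hent.pre.env.ok.inside _ hB
    have hst := hent.pre.free.offStack _ hB
    simp only [] at hin hst
    apply Block.Kept.of_sameExcept hs
    · exact scratch_off hent _ _ (by simp only []; omega)
    · simp only []
      omega

/-- **`LoopCore` over stores into the scratch part of the own frame**, for a counter `j'` (`j' = j`: `hnew` is vacuous; the latch:
`j' = j + 1` and `hnew` is about row `j`). -/
theorem core_scratch {u₀ : State} {g : G} (hent : Entered u₀ g) {cs pcount j j' : Nat} {v v' : State}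
    (h : LoopCore u₀ g cs pcount j v) (hrbp : v'.reg .rbp = g.e.reg .rsp - 8) (hrsp : v'.reg .rsp = g.e.reg .rsp - 248)
    (code : CodeOK u₀ v'.mem) (inv : abiInv v') (hr12 : v'.reg .r12 = g.e.reg .rdi) (hr15 : v'.reg .r15 = UInt64.ofNat j')
    (hs : Mem.SameExcept (scratch g) v.mem v'.mem)
    (hnew : ∀ j'', j ≤ j'' → j'' < j' → g.rowsB j'' → Fill v'.mem g.f g.r g.TB g.C g.PRD j'' (cs + 1)) :
    LoopCore u₀ g cs pcount j' v' := by
  have c := h.common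
  have c' : Common u₀ g v' := common_scratch hent c hrbp hrsp code inv hs
  have hch : g.ch ≤ g.C := hent.args.ch_le
  have hW := c.w_pos hent
  refine ⟨c', ⟨h.path.pathB, ?_, ?_, ?_⟩, hr12, hr15, ?_, ?_, ?_, ?_, h.lt, ?_⟩
  · rw [show v'.mem.readLE (g.e.reg .rsp - 168) 8 = v.mem.readLE (g.e.reg .rsp - 168) 8 from
      scratch_read hent hs 168 8 (by omega) (by omega) (by omega)]
    exact h.path.sl_dnd
  · rw [show v'.mem.readLE (g.e.reg .rsp - 160) 4 = v.mem.readLE (g.e.reg .rsp - 160) 4 from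
      scratch_read hent hs 160 4 (by omega) (by omega) (by omega)]
    exact h.path.sl_cs
  · rw [show v'.mem.readLE (g.e.reg .rsp - 244) 4 = v.mem.readLE (g.e.reg .rsp - 244) 4 from
      scratch_read hent hs 244 4 (by omega) (by omega) (by omega)]
    exact h.path.sl_tap
  · rw [show v'.mem.readLE (g.e.reg .rsp - 208) 8 = v.mem.readLE (g.e.reg .rsp - 208) 8 from
      scratch_read hent hs 208 8 (by omega) (by omega) (by omega)]
    exact h.sl_r
  · rw [show v'.mem.readLE (g.e.reg .rsp - 228) 4 = v.mem.readLE (g.e.reg .rsp - 228) 4 from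
      scratch_read hent hs 228 4 (by omega) (by omega) (by omega)]
    exact h.sl_pass
  · rw [show v'.mem.readLE (g.e.reg .rsp - 248) 4 = v.mem.readLE (g.e.reg .rsp - 248) 4 from
      scratch_read hent hs 248 4 (by omega) (by omega) (by omega)]
    exact h.sl_pcount
  · apply h.wb.frame (fun _ hj => hj) ?_ hW
    intro j' m hrow hf hm
    exact fill_scratch hent c c' hs (by have := hrow.1; omega) hm hf
  · intro j'' hj'' hrow
    have hcs := h.wb.slot_lt hW h.lt
    by_cases hlt : j'' < j
    · exact fill_scratch hent c c' hs (by have := hrow.1; omega) (by omega) (h.fill j'' hlt hrow)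
    · exact hnew j'' (by omega) hj'' hrow

/-- `At29` (after the j-loop) from `LoopCore` with the counter at `ch`: every row that matters is filled up to `class_set + 1`. -/
theorem at29_of_core {u₀ : State} {g : G} {cs pcount j : Nat} {v : State} (hrip : v.rip = L.decode_residue.cut29)
    (h : LoopCore u₀ g cs pcount j v) (hj : g.ch ≤ j) : At29 u₀ g cs pcount v :=
  ⟨hrip, h.common, h.path, h.sl_r, h.sl_pass, h.sl_pcount,
    h.wb.enter0 h.lt (fun j' hrow => h.fill j' (by have := hrow.1; omega) hrow)⟩

/-- The byte `do_not_decode[j]` as the machine addresses it. -/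
theorem dnd_read (g : G) (m : Mem) (j : Nat) : m.readLE (g.e.reg .r9 + UInt64.ofNat j) 1 = m.u8 (g.dnd + j) := by
  unfold Mem.u8 G.dnd
  rw [← addr_add, addr_toNat]

/-- The low half of a small number held in a register. -/
theorem part32_ofNat (n : Nat) (_h : n < 2 ^ 32) : Word.part .w32 (UInt64.ofNat n) = BitVec.ofNat 32 n := by
  apply BitVec.eq_of_toNat_eq
  rw [Asan.part32_toNat, UInt64.toNat_ofNat', BitVec.toNat_ofNat]
  have e : (2 : Nat) ^ 32 = 4294967296 := by decide
  have e2 : (2 : Nat) ^ 64 = 18446744073709551616 := by decide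
  rw [e, e2]
  omega

/-- The signed value of a small non-negative 32-bit number. -/
theorem toInt_smallNat (n : Nat) (h : n < 2 ^ 31) : (BitVec.ofNat 32 n).toInt = (n : Int) := by
  rw [toInt_ofNat32 n (by omega)]
  have := sint32_cases n
  omega

/-- `movsxd` of a small non-negative number, as a vector. -/
theorem sext_small_toNat (n : Nat) (h : n < 2 ^ 31) : (BitVec.signExtend 64 (BitVec.ofNat 32 n)).toNat = n := by
  have h1 := toNat_sext32 (BitVec.ofNat 32 n) (by rw [toNat_ofNat32 n (by omega)]; exact h)
  rw [toNat_ofNat32 n (by omega)] at h1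
  unfold Word.ofBV at h1
  simp only [UInt64.toNat_ofBitVec, BitVec.setWidth_eq] at h1
  exact h1

/-- `movsxd` of a small non-negative number, as a word. -/
theorem sext_small (n : Nat) (h : n < 2 ^ 31) : Word.ofBV (BitVec.signExtend 64 (BitVec.ofNat 32 n)) = UInt64.ofNat n := by
  apply UInt64.toNat_inj.mp
  rw [toNat_sext32 _ (by rw [toNat_ofNat32 n (by omega)]; exact h), toNat_ofNat32 n (by omega), UInt64.toNat_ofNat']
  have e2 : (2 : Nat) ^ 64 = 18446744073709551616 := by decide
  omega

/-- `add r32, 1` on a small number. -/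
theorem inc_small (n : Nat) (h : n < 2 ^ 31) : Word.ofBV (BitVec.ofNat 32 n + 1#32) = UInt64.ofNat (n + 1) := by
  apply UInt64.toNat_inj.mp
  rw [toNat_ofBV32, BitVec.toNat_add, toNat_ofNat32 n (by omega), UInt64.toNat_ofNat']
  have e : (1#32).toNat = 1 := by decide
  rw [e]
  have e2 : (2 : Nat) ^ 64 = 18446744073709551616 := by decide
  omega

/-- Where a range inside an allocated block is: in the data space and off the stack region. -/
theorem where_blk {u₀ : State} {g : G} (hent : Entered u₀ g) {B : Block} (hB : g.Blk B) :
    0x100000 ≤ B.base ∧ B.base + B.size ≤ 0xC00000 ∧ (B.base + B.size ≤ 0x700000 ∨ 0x800000 ≤ B.base) := by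
  have hin := hent.pre.env.ok.inside _ hB
  have hst := hent.pre.free.offStack _ hB
  omega

/-- Where the residue record is. -/
theorem where_r {u₀ : State} {g : G} (hent : Entered u₀ g) :
    0x100000 ≤ g.r ∧ g.r + 32 ≤ 0xC00000 ∧ (g.r + 32 ≤ 0x700000 ∨ 0x800000 ≤ g.r) := by
  have hR : ResidueOK g.Blk g.e.mem g.f := hent.vorbis.residue
  have hw := where_blk hent hR.R2
  have hlt := hent.args.rn_lt
  have h1 := hR.R1
  have e : g.r = stb_vorbis.residue_config g.e.mem g.f + 32 * g.rn := rfl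
  simp only [voff] at hw
  omega

/-- The scratch spans with the stack pointer spelled as the walker spells it. -/
theorem scratch_def (g : G) : scratch g =
    [⟨(g.e.reg .rsp).toNat - 848, (g.e.reg .rsp).toNat - 248⟩, ⟨(g.e.reg .rsp).toNat - 192, (g.e.reg .rsp).toNat - 184⟩,
     ⟨(g.e.reg .rsp).toNat - 224, (g.e.reg .rsp).toNat - 220⟩] := id rfl


/-- The live objects inside the function contain the entry's. -/
theorem objs_sub (g : G) : ∀ o, o ∈ stackObjs g.frames ++ g.others → o ∈ stackObjs g.frames' ++ g.others' := by
  intro o ho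
  unfold G.frames' G.others'
  rw [stackObjs_cons]
  rcases List.mem_append.mp ho with h | h
  · exact List.mem_append_left _ (List.mem_append_right _ h)
  · exact List.mem_append_right _ (List.mem_cons_of_mem _ h)

/-- `j < ch` from the loop test `cmp r15d, eax ; jge` not taken. -/
theorem lt_of_not_jge {j ch : Nat} (hj : j < 2 ^ 31) (hch : ch < 2 ^ 31)
    (h : ¬(BitVec.ofNat 32 ch).toInt ≤ (BitVec.ofNat 32 j).toInt) : j < ch := by
  rw [toInt_smallNat _ hj, toInt_smallNat _ hch] at h
  omega

/-- `ch ≤ j` from the loop test `cmp r15d, eax ; jge` taken. -/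
theorem ge_of_jge {j ch : Nat} (hj : j < 2 ^ 31) (hch : ch < 2 ^ 31)
    (h : (BitVec.ofNat 32 ch).toInt ≤ (BitVec.ofNat 32 j).toInt) : ch ≤ j := by
  rw [toInt_smallNat _ hj, toInt_smallNat _ hch] at h
  omega


/-- `movzx eax, byte [m]` as a 64-bit register value. -/
theorem zx8_word (x : Nat) (hx : x < 256) :
    Word.ofBV (BitVec.setWidth 64 (BitVec.zeroExtend 32 (BitVec.ofNat 8 x))) = UInt64.ofNat x := by
  apply UInt64.toNat_inj.mp
  unfold Word.ofBV
  simp only [UInt64.toNat_ofBitVec, BitVec.toNat_setWidth, BitVec.toNat_ofNat, UInt64.toNat_ofNat']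
  omega

/-- The class book's address as the machine computes it: `f->codebooks + 2120 · r->classbook`, read in the present memory. -/
theorem cb_eq {u₀ : State} {g : G} {v : State} (c : Common u₀ g v) :
    UInt64.ofNat (v.mem.readLE (UInt64.ofNat g.f + 168) 8) + UInt64.ofNat (v.mem.readLE (UInt64.ofNat g.r + 13) 1) * 2120 =
      UInt64.ofNat (clsBook g) := by
  have e : clsBook g = v.mem.readLE (UInt64.ofNat g.f + 168) 8 + 2120 * v.mem.readLE (UInt64.ofNat g.r + 13) 1 := by
    unfold clsBook
    rw [← c.reads.cbk]
    simp only [vacc, voff]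
    unfold Mem.u64 Mem.u8
    rw [← addr_add_lit, ← addr_add_lit]
    rfl
  rw [e, UInt64.ofNat_add, UInt64.ofNat_mul, UInt64.mul_comm]
  rfl

/-- The exits of the segment. -/
abbrev Exit (u₀ : State) (g : G) (cs pcount : Nat) (v : State) : Prop := At29 u₀ g cs pcount v ∨ At39 u₀ g v

/-- The loop invariant with the counter exposed: `At28` with `r15d = j`. -/
def Head (u₀ : State) (g : G) (cs pcount j : Nat) (v : State) : Prop :=
  v.rip = L.decode_residue.cut28 ∧ LoopCore u₀ g cs pcount j v ∧ j ≤ g.ch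

/-- **THE COMPOSITION of the five blocks** (a `ReachVia.loop` with measure `ch − j` around `ReachVia.trans`): if each block takes
its entry assertion to one of its exit assertions, the segment's statement holds. -/
theorem composeBlocks {Lay : Layout} {μ : Microarch} {u₀ : State} {g : G} {cs pcount : Nat}
    (blk0 : ∀ j v, Head u₀ g cs pcount j v → ReachVia Lay μ WayInv v (fun v' =>
      Exit u₀ g cs pcount v' ∨ Head u₀ g cs pcount (j + 1) v' ∨ AtDec u₀ g cs pcount j v'))
    (blk1 : ∀ j v, AtDec u₀ g cs pcount j v → ReachVia Lay μ WayInv v (fun v' => AtAcc u₀ g cs pcount j v'))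
    (blk2 : ∀ j v, AtAcc u₀ g cs pcount j v → ReachVia Lay μ WayInv v (fun v' => AtRaw u₀ g cs pcount j v'))
    (blk3 : ∀ j v, AtRaw u₀ g cs pcount j v → ReachVia Lay μ WayInv v (fun v' => AtTemp u₀ g cs pcount j v'))
    (blk4 : ∀ j v, AtTemp u₀ g cs pcount j v → ReachVia Lay μ WayInv v (fun v' =>
      Exit u₀ g cs pcount v' ∨ Head u₀ g cs pcount (j + 1) v')) :
    ∀ v, At28 u₀ g cs pcount v → ReachVia Lay μ WayInv v (fun v' => At29 u₀ g cs pcount v' ∨ At39 u₀ g v') := by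
  intro v hat
  obtain ⟨hrip, c, path, hr12, sl_r, sl_pass, sl_pcount, wb, lt, j, hj, hr15, hfill⟩ := hat
  have hhead : Head u₀ g cs pcount j v := ⟨hrip, ⟨c, path, hr12, hr15, sl_r, sl_pass, sl_pcount, wb, lt, hfill⟩, hj⟩
  -- the loop: invariant `∃ j, Head … j`, measure `ch − j` with `j` read from r15
  have key : ∀ n : Nat, ∀ j v, g.ch - j = n → Head u₀ g cs pcount j v →
      ReachVia Lay μ WayInv v (fun v' => Exit u₀ g cs pcount v') := by
    intro n
    induction n using Nat.strongRecOn with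
    | _ n ih =>
      intro j v hn hh
      have next : ∀ v', Head u₀ g cs pcount (j + 1) v' → ReachVia Lay μ WayInv v' (fun v' => Exit u₀ g cs pcount v') := by
        intro v' hh'
        have hle : j + 1 ≤ g.ch := hh'.2.2
        exact ih (g.ch - (j + 1)) (by omega) (j + 1) v' rfl hh'
      refine (blk0 j v hh).trans ?_
      intro v1 h1
      rcases h1 with hex | hnx | hdec
      · exact ReachVia.done hex
      · exact next v1 hnx
      · refine (blk1 j v1 hdec).trans ?_
        intro v2 h2
        refine (blk2 j v2 h2).trans ?_
        intro v3 h3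
        refine (blk3 j v3 h3).trans ?_
        intro v4 h4
        refine (blk4 j v4 h4).trans ?_
        intro v5 h5
        rcases h5 with hex | hnx
        · exact ReachVia.done hex
        · exact next v5 hnx
  exact key (g.ch - j) j v rfl hhead

/-- The windows of `*f` that the bit reader writes (`Reader.winsBits f`: prep_huffman's and codebook_decode_scalar_raw's
footprint, the inline `f->acc` / `f->valid_bits` stores). -/
def fwins (g : G) : List Span :=
  [⟨g.f + 48, g.f + 56⟩, ⟨g.f + 84, g.f + 96⟩, ⟨g.f + 136, g.f + 144⟩, ⟨g.f + 1484, g.f + 1749⟩, ⟨g.f + 1752, g.f + 1784⟩]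

/-- What a block of the loop body may store to: the scratch part of the own frame and the bit reader's windows of `*f`. -/
def stepSpans (g : G) : List Span := scratch g ++ fwins g

/-- A span of `stepSpans` is a scratch span or lies inside `*f`. -/
theorem stepSpans_cases (g : G) (w : Span) (hw : w ∈ stepSpans g) :
    w ∈ scratch g ∨ (g.f + 48 ≤ w.lo ∧ w.hi ≤ g.f + 1784 ∧
      ((g.f + 48 ≤ w.lo ∧ w.hi ≤ g.f + 56) ∨ (g.f + 84 ≤ w.lo ∧ w.hi ≤ g.f + 96) ∨ (g.f + 136 ≤ w.lo ∧ w.hi ≤ g.f + 144) ∨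
        (g.f + 1484 ≤ w.lo ∧ w.hi ≤ g.f + 1749) ∨ (g.f + 1752 ≤ w.lo ∧ w.hi ≤ g.f + 1784))) := by
  rcases List.mem_append.mp hw with h | h
  · exact Or.inl h
  · right
    simp only [fwins, List.mem_cons, List.mem_nil_iff, or_false] at h
    rcases h with rfl | rfl | rfl | rfl | rfl <;> simp only [] <;> omega

/-- The temp block does not meet `*f`. -/
theorem tb_off_f {u₀ : State} {g : G} (hent : Entered u₀ g) {v : State} (c : Common u₀ g v) :
    g.TB.base + g.TB.size ≤ g.f ∨ g.f + 1808 ≤ g.TB.base := by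
  have hob : g.Blk (objBlock g.f) := hent.pre.vorbis.obj
  have hgap := hent.pre.free.offGap _ hob
  have hb : ADOBusy g.A' g.others' v.mem g.f g.sz := c.point.busy
  have hr := hb.ok.tblock_range c.tblock
  have h2 := hb.ok.AR2
  have hle := le_r8 g.TB.size
  have eB : g.A'.B = g.A.B := rfl
  have eL : g.A'.L = g.A.L := rfl
  have eS : g.A'.S = g.A.S := rfl
  rw [eB, eL] at hr
  rw [eS] at h2
  simp only [vblock, voff] at hgap
  omega

/-- Every span of `stepSpans` is a legal decode-time store. -/
theorem stepSpans_storeOK {u₀ : State} {g : G} (hent : Entered u₀ g) (m : Mem) :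
    ∀ w, w ∈ stepSpans g → StoreOK g.Blk m g.f w := by
  intro w hw
  rcases stepSpans_cases g w hw with h | h
  · apply StoreOK.off
    intro B hB
    have hwb := where_blk hent hB
    have := scratch_off hent B.base (B.base + B.size) (by omega) w h
    omega
  · apply StoreOK.hole
    unfold InHole
    omega

/-- A read of the own frame off the scratch spans is unchanged by a step. -/
theorem step_read {u₀ : State} {g : G} (hent : Entered u₀ g) {m m' : Mem} (hs : Mem.SameExcept (stepSpans g) m m')
    (k n : Nat) (hk : k ≤ 248) (hn : n ≤ k) (hd : k + 0 ≤ 184 ∨ (192 ≤ k - n + 0 ∧ k ≤ 220) ∨ 224 ≤ k - n + 0) :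
    m'.readLE (g.e.reg .rsp - UInt64.ofNat k) n = m.readLE (g.e.reg .rsp - UInt64.ofNat k) n := by
  have hroom := hent.room
  have hwf := where_f hent
  have eR : (g.e.reg .rsp).toNat = g.RA := rfl
  have ea : (g.e.reg .rsp - UInt64.ofNat k).toNat = g.RA - k := by
    rw [UInt64.toNat_sub_of_le _ _ (by rw [UInt64.le_iff_toNat_le, UInt64.toNat_ofNat']; omega), UInt64.toNat_ofNat']
    omega
  apply hs.readLE _ _ (by omega)
  intro w hw
  rcases stepSpans_cases g w hw with h | h
  · simp only [scratch, List.mem_cons, List.mem_nil_iff, or_false] at h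
    rcases h with rfl | rfl | rfl <;> simp only [] <;> omega
  · omega

/-- **COMMON over a step of the loop body**: stores into the scratch part of the own frame and into the bit reader's windows of
`*f`, with `Bits` re-established and `μ` not increased (a reader's post, or the inline stores). -/
theorem common_step {u₀ : State} {g : G} (hent : Entered u₀ g) {v v' : State} (c : Common u₀ g v)
    (hrbp : v'.reg .rbp = g.e.reg .rsp - 8) (hrsp : v'.reg .rsp = g.e.reg .rsp - 248)
    (code : CodeOK u₀ v'.mem) (inv : abiInv v')
    (hs : Mem.SameExcept (stepSpans g) v.mem v'.mem)
    (hbits : Bits g.Blk g.len v'.mem g.f) (hmu : mu v'.mem g.f ≤ mu v.mem g.f) : Common u₀ g v' := by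
  have hroom := hent.room
  have hwf := where_f hent
  have hwt := where_tb c
  have htf := tb_off_f hent c
  have eR : (g.e.reg .rsp).toNat = g.RA := rfl
  -- no span meets a range that is outside the stack region and outside `*f`
  have off : ∀ lo hi : Nat, (hi ≤ 0x700000 ∨ 0x800000 ≤ lo) → (hi ≤ g.f + 48 ∨ g.f + 1784 ≤ lo) →
      ∀ w, w ∈ stepSpans g → hi ≤ w.lo ∨ w.hi ≤ lo := by
    intro lo hi h1 h2 w hw
    rcases stepSpans_cases g w hw with h | h
    · exact scratch_off hent lo hi h1 w h
    · omega
  have hun : ShadowUntouched v.mem v'.mem := hs.eqOn 0xC00000 0xE00000 (off _ _ (by omega) (by omega))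
  have hado : ObjEq ADO.wins v.mem g.f v'.mem g.f := by
    apply ObjEq.of_sameExcept hs
    · intro w hw
      simp only [ADO.wins, List.mem_cons, List.mem_nil_iff, or_false] at hw
      rcases hw with rfl | rfl <;> simp only [] <;> omega
    · intro w hw s hsp
      simp only [ADO.wins, List.mem_cons, List.mem_nil_iff, or_false] at hw
      rcases stepSpans_cases g s hsp with h | h
      · have := scratch_off hent g.f (g.f + 1808) (by omega) s h
        rcases hw with rfl | rfl <;> simp only [] <;> omega
      · rcases hw with rfl | rfl <;> simp only [] <;> omega
  have hbusy : ADOBusy g.A' g.others' v'.mem g.f g.sz :=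
    (show ADOBusy g.A' g.others' v.mem g.f g.sz from c.point.busy).transfer hado
  have htb : TempRows v'.mem g.TB g.C g.PRD := by
    have hsz := c.tb.size
    have h3 : g.C * (8 + 8 * g.PRD) = g.C * 8 + g.C * (8 * g.PRD) := Nat.mul_add _ _ _
    apply c.tb.frame
    apply Block.Kept.of_sameExcept hs
    · intro w hw
      have := off g.TB.base (g.TB.base + 8 * g.C) (by omega) (by omega) w hw
      simp only []
      omega
    · simp only []
      omega
  have hsame : Mem.SameExcept (g.spec.footprint g.e) g.e.mem v'.mem := by
    apply c.same.step_same hs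
    intro w hw a h1 h2
    have ef : (g.e.reg .rdi).toNat = g.f := rfl
    rcases List.mem_append.mp hw with h | h
    · refine ⟨⟨g.RA - 848, g.RA⟩, ?_, ?_⟩
      · unfold Spec.footprint
        exact List.mem_cons_self
      · simp only [scratch, List.mem_cons, List.mem_nil_iff, or_false] at h
        rcases h with rfl | rfl | rfl <;> simp only [] at h1 h2 ⊢ <;> omega
    · simp only [fwins, List.mem_cons, List.mem_nil_iff, or_false] at h
      unfold Spec.footprint
      show ∃ w', w' ∈ _ :: DecodeResidue.writes g.A g.e ∧ _
      unfold DecodeResidue.writes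
      rw [ef]
      rcases h with rfl | rfl | rfl | rfl | rfl
      · exact ⟨⟨g.f + 48, g.f + 56⟩, by simp, h1, h2⟩
      · exact ⟨⟨g.f + 84, g.f + 96⟩, by simp, h1, h2⟩
      · refine ⟨⟨g.f + 132, g.f + 144⟩, by simp, ?_, h2⟩
        simp only [] at h1 ⊢
        omega
      · exact ⟨⟨g.f + 1484, g.f + 1749⟩, by simp, h1, h2⟩
      · exact ⟨⟨g.f + 1752, g.f + 1784⟩, by simp, h1, h2⟩
  refine Common.of_frame hent hrbp hrsp code inv ?_ ?_ ?_ ?_ ?_ ?_ ?_ ?_ ?_ ?_ ?_ ?_ ?_ ?_ hsame (c.shadow.untouched hun) hbits hbusy htb ?_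
  · rw [show v'.mem.readLE (g.e.reg .rsp - 8) 8 = v.mem.readLE (g.e.reg .rsp - 8) 8 from step_read hent hs 8 8 (by omega) (by omega) (by omega)]
    exact c.s_rbp
  · rw [show v'.mem.readLE (g.e.reg .rsp - 16) 8 = v.mem.readLE (g.e.reg .rsp - 16) 8 from step_read hent hs 16 8 (by omega) (by omega) (by omega)]
    exact c.s_r15
  · rw [show v'.mem.readLE (g.e.reg .rsp - 24) 8 = v.mem.readLE (g.e.reg .rsp - 24) 8 from step_read hent hs 24 8 (by omega) (by omega) (by omega)]
    exact c.s_r14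
  · rw [show v'.mem.readLE (g.e.reg .rsp - 32) 8 = v.mem.readLE (g.e.reg .rsp - 32) 8 from step_read hent hs 32 8 (by omega) (by omega) (by omega)]
    exact c.s_r13
  · rw [show v'.mem.readLE (g.e.reg .rsp - 40) 8 = v.mem.readLE (g.e.reg .rsp - 40) 8 from step_read hent hs 40 8 (by omega) (by omega) (by omega)]
    exact c.s_r12
  · rw [show v'.mem.readLE (g.e.reg .rsp - 48) 8 = v.mem.readLE (g.e.reg .rsp - 48) 8 from step_read hent hs 48 8 (by omega) (by omega) (by omega)]
    exact c.s_rbx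
  · rw [show v'.mem.readLE (g.e.reg .rsp - 184) 8 = v.mem.readLE (g.e.reg .rsp - 184) 8 from step_read hent hs 184 8 (by omega) (by omega) (by omega)]
    exact c.fr_f
  · rw [show v'.mem.readLE (g.e.reg .rsp - 216) 8 = v.mem.readLE (g.e.reg .rsp - 216) 8 from step_read hent hs 216 8 (by omega) (by omega) (by omega)]
    exact c.fr_rb
  · rw [show v'.mem.readLE (g.e.reg .rsp - 156) 4 = v.mem.readLE (g.e.reg .rsp - 156) 4 from step_read hent hs 156 4 (by omega) (by omega) (by omega)]
    exact c.fr_ch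
  · rw [show v'.mem.readLE (g.e.reg .rsp - 196) 4 = v.mem.readLE (g.e.reg .rsp - 196) 4 from step_read hent hs 196 4 (by omega) (by omega) (by omega)]
    exact c.fr_prd
  · rw [show v'.mem.readLE (g.e.reg .rsp - 200) 4 = v.mem.readLE (g.e.reg .rsp - 200) 4 from step_read hent hs 200 4 (by omega) (by omega) (by omega)]
    exact c.fr_w
  · rw [show v'.mem.readLE (g.e.reg .rsp - 232) 4 = v.mem.readLE (g.e.reg .rsp - 232) 4 from step_read hent hs 232 4 (by omega) (by omega) (by omega)]
    exact c.fr_rtype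
  · rw [show v'.mem.readLE (g.e.reg .rsp - 176) 8 = v.mem.readLE (g.e.reg .rsp - 176) 8 from step_read hent hs 176 8 (by omega) (by omega) (by omega)]
    exact c.fr_pcd
  · rw [show v'.mem.readLE (g.e.reg .rsp - 240) 8 = v.mem.readLE (g.e.reg .rsp - 240) 8 from step_read hent hs 240 8 (by omega) (by omega) (by omega)]
    exact c.fr_si
  · exact Nat.le_trans hmu c.mu_le

/-- **FILL over a step of the loop body.** -/
theorem fill_step {u₀ : State} {g : G} (hent : Entered u₀ g) {v v' : State} (c : Common u₀ g v) (c' : Common u₀ g v')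
    (hs : Mem.SameExcept (stepSpans g) v.mem v'.mem) {j m : Nat} (hj : j < g.C) (hm : m ≤ g.PRD)
    (h : Fill v.mem g.f g.r g.TB g.C g.PRD j m) : Fill v'.mem g.f g.r g.TB g.C g.PRD j m := by
  have hwt := where_tb c
  have htf := tb_off_f hent c
  have hwf := where_f hent
  apply h.frame hj hm c.tb.size
  · apply Block.Kept.of_sameExcept hs
    · intro w hw
      rcases stepSpans_cases g w hw with h | h
      · exact scratch_off hent _ _ (by omega) w h
      · omega
    · omega
  · exact reads_between c c'
  · have hv : Real.VorbisOK g.len g.Blk v.mem g.f := c.point.vorbis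
    have hcfg : ConfigOK g.Blk v.mem g.f := hv.config
    have hrec := ResidueOK.Owns.record (mem := v.mem) (f := g.f) g.rn (c.rn_lt hent) _
      (ResidueAtOK.Owns.classdata (mem := v.mem) (f := g.f) (r := stb_vorbis.residue_config_at v.mem g.f g.rn))
    rw [c.config_at] at hrec
    exact StoreOK.reads_kept hcfg hent.pre.env.ok c.sep hs (stepSpans_storeOK hent v.mem) _ (ConfigOK.Reads.residue hrec)

/-- **`LoopCore` over a step of the loop body**, for the same counter. -/
theorem core_step {u₀ : State} {g : G} (hent : Entered u₀ g) {cs pcount j : Nat} {v v' : State}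
    (h : LoopCore u₀ g cs pcount j v) (hrbp : v'.reg .rbp = g.e.reg .rsp - 8) (hrsp : v'.reg .rsp = g.e.reg .rsp - 248)
    (code : CodeOK u₀ v'.mem) (inv : abiInv v') (hr12 : v'.reg .r12 = g.e.reg .rdi) (hr15 : v'.reg .r15 = UInt64.ofNat j)
    (hs : Mem.SameExcept (stepSpans g) v.mem v'.mem)
    (hbits : Bits g.Blk g.len v'.mem g.f) (hmu : mu v'.mem g.f ≤ mu v.mem g.f) : LoopCore u₀ g cs pcount j v' := by
  have c := h.common
  have c' : Common u₀ g v' := common_step hent c hrbp hrsp code inv hs hbits hmu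
  have hch : g.ch ≤ g.C := hent.args.ch_le
  have hW := c.w_pos hent
  refine ⟨c', ⟨h.path.pathB, ?_, ?_, ?_⟩, hr12, hr15, ?_, ?_, ?_, ?_, h.lt, ?_⟩
  · rw [show v'.mem.readLE (g.e.reg .rsp - 168) 8 = v.mem.readLE (g.e.reg .rsp - 168) 8 from
      step_read hent hs 168 8 (by omega) (by omega) (by omega)]
    exact h.path.sl_dnd
  · rw [show v'.mem.readLE (g.e.reg .rsp - 160) 4 = v.mem.readLE (g.e.reg .rsp - 160) 4 from
      step_read hent hs 160 4 (by omega) (by omega) (by omega)]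
    exact h.path.sl_cs
  · rw [show v'.mem.readLE (g.e.reg .rsp - 244) 4 = v.mem.readLE (g.e.reg .rsp - 244) 4 from
      step_read hent hs 244 4 (by omega) (by omega) (by omega)]
    exact h.path.sl_tap
  · rw [show v'.mem.readLE (g.e.reg .rsp - 208) 8 = v.mem.readLE (g.e.reg .rsp - 208) 8 from
      step_read hent hs 208 8 (by omega) (by omega) (by omega)]
    exact h.sl_r
  · rw [show v'.mem.readLE (g.e.reg .rsp - 228) 4 = v.mem.readLE (g.e.reg .rsp - 228) 4 from
      step_read hent hs 228 4 (by omega) (by omega) (by omega)]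
    exact h.sl_pass
  · rw [show v'.mem.readLE (g.e.reg .rsp - 248) 4 = v.mem.readLE (g.e.reg .rsp - 248) 4 from
      step_read hent hs 248 4 (by omega) (by omega) (by omega)]
    exact h.sl_pcount
  · apply h.wb.frame (fun _ hj => hj) ?_ hW
    intro j' m hrow hf hm
    exact fill_step hent c c' hs (by have := hrow.1; omega) hm hf
  · intro j'' hj'' hrow
    have hcs := h.wb.slot_lt hW h.lt
    exact fill_step hent c c' hs (by have := hrow.1; omega) (by omega) (h.fill j'' hj'' hrow)

/-- **`LoopBody` over a step of the loop body**: `r13` kept; the spill `[rbp−0xb8]` is inside the scratch part, so it is re-read. -/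
theorem body_step {u₀ : State} {g : G} (hent : Entered u₀ g) {cs pcount j : Nat} {v v' : State}
    (h : LoopBody u₀ g cs pcount j v) (hrbp : v'.reg .rbp = g.e.reg .rsp - 8) (hrsp : v'.reg .rsp = g.e.reg .rsp - 248)
    (code : CodeOK u₀ v'.mem) (inv : abiInv v') (hr12 : v'.reg .r12 = v.reg .r12) (hr15 : v'.reg .r15 = v.reg .r15)
    (hr13 : v'.reg .r13 = v.reg .r13) (hslj : v'.mem.readLE (g.e.reg .rsp - 192) 8 = j)
    (hs : Mem.SameExcept (stepSpans g) v.mem v'.mem)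
    (hbits : Bits g.Blk g.len v'.mem g.f) (hmu : mu v'.mem g.f ≤ mu v.mem g.f) : LoopBody u₀ g cs pcount j v' :=
  ⟨core_step hent h.core hrbp hrsp code inv (hr12.trans h.core.r12) (hr15.trans h.core.r15) hs hbits hmu,
    h.j_lt, h.row, hslj, hr13.trans h.r13⟩

/-- The step spans with the stack pointer and `f` spelled as the walker spells them. -/
theorem stepSpans_def (g : G) : stepSpans g =
    [⟨(g.e.reg .rsp).toNat - 848, (g.e.reg .rsp).toNat - 248⟩, ⟨(g.e.reg .rsp).toNat - 192, (g.e.reg .rsp).toNat - 184⟩,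
     ⟨(g.e.reg .rsp).toNat - 224, (g.e.reg .rsp).toNat - 220⟩,
     ⟨g.f + 48, g.f + 56⟩, ⟨g.f + 84, g.f + 96⟩, ⟨g.f + 136, g.f + 144⟩, ⟨g.f + 1484, g.f + 1749⟩,
     ⟨g.f + 1752, g.f + 1784⟩] := id rfl

/-- A scratch-only batch of stores is a step that keeps `Bits` and `μ`. -/
theorem step_of_scratch {u₀ : State} {g : G} (hent : Entered u₀ g) {v : State} (c : Common u₀ g v) {m' : Mem}
    (hs : Mem.SameExcept (scratch g) v.mem m') :
    Mem.SameExcept (stepSpans g) v.mem m' ∧ Bits g.Blk g.len m' g.f ∧ mu m' g.f = mu v.mem g.f := by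
  have hwf := where_f hent
  have hobj : ObjSame g.f v.mem m' := by
    apply ObjSame.of_sameExcept hs (by simp only [voff]; omega)
    intro w hw
    have := scratch_off hent g.f (g.f + 1808) (by omega) w hw
    omega
  refine ⟨?_, c.point.vorbis.bits.frame hobj, mu_transfer (hobj.sub (by decide))⟩
  apply hs.mono
  intro w hw a h1 h2
  exact ⟨w, List.mem_append_left _ hw, h1, h2⟩

/-- **`LoopBody` over stores into the scratch part of the own frame only** (check calls, spills). -/
theorem body_scratch {u₀ : State} {g : G} (hent : Entered u₀ g) {cs pcount j : Nat} {v v' : State}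
    (h : LoopBody u₀ g cs pcount j v) (hrbp : v'.reg .rbp = g.e.reg .rsp - 8) (hrsp : v'.reg .rsp = g.e.reg .rsp - 248)
    (code : CodeOK u₀ v'.mem) (inv : abiInv v') (hr12 : v'.reg .r12 = v.reg .r12) (hr15 : v'.reg .r15 = v.reg .r15)
    (hr13 : v'.reg .r13 = v.reg .r13) (hslj : v'.mem.readLE (g.e.reg .rsp - 192) 8 = j)
    (hs : Mem.SameExcept (scratch g) v.mem v'.mem) : LoopBody u₀ g cs pcount j v' := by
  obtain ⟨h1, h2, h3⟩ := step_of_scratch hent h.core.common hs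
  exact body_step hent h hrbp hrsp code inv hr12 hr15 hr13 hslj h1 h2 (Nat.le_of_eq h3)

/-- The class book is one of the decoder's codebooks: `CodebookOK` in the present memory. -/
theorem cb_ok {u₀ : State} {g : G} (hent : Entered u₀ g) {v : State} (c : Common u₀ g v) : CodebookOK g.Blk v.mem (clsBook g) := by
  have hv : Real.VorbisOK g.len g.Blk v.mem g.f := c.point.vorbis
  have h := hv.config.books (Residue.classbook v.mem g.r) (c.resAt hent).R7
  have e : stb_vorbis.codebooks_at v.mem g.f (Residue.classbook v.mem g.r) = clsBook g := c.reads.cbk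
  rw [e] at h
  exact h

/-- A field of the class book's header is a check site. -/
theorem site_cb {u₀ : State} {g : G} (hent : Entered u₀ g) {v : State} (c : Common u₀ g v) (off n : Nat)
    (hoff : off + n ≤ 2120) (hn : 1 ≤ n) : Site g.Live' (clsBook g + off) n := by
  have hv : Real.VorbisOK g.len g.Blk v.mem g.f := c.point.vorbis
  have hL : BlkLive g.Blk g.Live' := c.point.env.live
  have e : Residue.cbk v.mem g.f g.r = clsBook g := c.reads.cbk
  rw [← e]
  exact (c.resAt hent).site_cbk hL hv.config.cb0.F2 off n (by simp only [voff]; omega) hn rfl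

/-- Where the class book's struct is: in the data space and off the stack region. -/
theorem where_cb {u₀ : State} {g : G} (hent : Entered u₀ g) :
    0x100000 ≤ clsBook g ∧ clsBook g + 2120 ≤ 0xC00000 ∧ (clsBook g + 2120 ≤ 0x700000 ∨ 0x800000 ≤ clsBook g) := by
  have hcfg : ConfigOK g.Blk g.e.mem g.f := hent.vorbis.config
  have hw := where_blk hent hcfg.cb0.F2
  have hR : ResidueOK g.Blk g.e.mem g.f := hent.vorbis.residue
  have hrec : ResidueAtOK g.Blk g.e.mem g.f g.r := hR.record g.rn hent.args.rn_lt
  have h7 := hrec.R7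
  have hcnt := hcfg.cb0.F1
  have e : clsBook g = stb_vorbis.codebooks g.e.mem g.f + 2120 * Residue.classbook g.e.mem g.r := rfl
  simp only [voff] at hw
  omega

/-- **The class book's header reads as at the entry** in the memory of any cut point: the codebooks block is one of the blocks the
configuration reads, and the footprint so far consists of legal decode-time stores. -/
theorem cb_fields {u₀ : State} {g : G} (hent : Entered u₀ g) {v : State} (c : Common u₀ g v) :
    Codebook.SameFields g.e.mem v.mem (clsBook g) := by
  have hcfg : ConfigOK g.Blk g.e.mem g.f := hent.vorbis.config
  have hk := StoreOK.reads_kept hcfg hent.pre.env.ok hent.sep c.same hent.footprint_storeOK _ ConfigOK.Reads.codebooks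
  have hR : ResidueOK g.Blk g.e.mem g.f := hent.vorbis.residue
  have hrec : ResidueAtOK g.Blk g.e.mem g.f g.r := hR.record g.rn hent.args.rn_lt
  have h7 := hrec.R7
  have hcnt := hcfg.cb0.F1
  have e : clsBook g = stb_vorbis.codebooks g.e.mem g.f + 2120 * Residue.classbook g.e.mem g.r := rfl
  apply Codebook.SameFields.of_kept
  apply hk.mono
  · show stb_vorbis.codebooks g.e.mem g.f ≤ clsBook g
    omega
  · show clsBook g + Off.sizeof.Codebook ≤
      stb_vorbis.codebooks g.e.mem g.f + Off.sizeof.Codebook * (stb_vorbis.codebook_count g.e.mem g.f).toNat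
    simp only [voff]
    omega

/-- **Block 0** (0x10f7a5 … 0x10f806; C 2261–2263): the loop test, `do_not_decode[j]`, `c = f->codebooks + r->classbook`.
From the head with counter `j`: to `cut29` (`j = ch`), to the head with `j + 1` (`do_not_decode[j] ≠ 0`), or to `pDec`. -/
theorem blk0 {Lay : Layout} (hLay : Lay.hi = 0x1000000) {μ : Microarch} (hμ : UserX.MicroOK μ) {u₀ : State}
    (hcode : HasCodeNat Lay u₀ Vorbis.L.decode_residue.entry Vorbis.Code.code_decode_residue.nat Vorbis.L.decode_residue.size)
    (hl1 : Asan.SmallCheck Lay μ Vorbis.WayInv (Vorbis.CodeOK u₀) [.rax, .rdx] 1 Vorbis.L.__asan_load1_noabort.entry)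
    (hl8 : Asan.SmallCheck Lay μ Vorbis.WayInv (Vorbis.CodeOK u₀) [.rax, .rcx, .rdx] 8 Vorbis.L.__asan_load8_noabort.entry)
    {g : G} (hent : Entered u₀ g) {cs pcount : Nat} :
    ∀ j v, Head u₀ g cs pcount j v → ReachVia Lay μ WayInv v (fun v' =>
      Exit u₀ g cs pcount v' ∨ Head u₀ g cs pcount (j + 1) v' ∨ AtDec u₀ g cs pcount j v') := by
  intro j v hh
  obtain ⟨hrip, core, hj⟩ := hh
  have c := core.common
  have he := hent.entry
  v_entry he
  have hroom := hent.room
  have hwf := where_f hent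
  have hwr := where_r hent
  have hdnd := hent.args.dnd_stack
  have hchC : g.ch ≤ g.C := hent.args.ch_le
  have hC16 : g.C ≤ 16 := by
    have h1 := hent.vorbis.header.HD1
    have e : g.C = (stb_vorbis.channels g.e.mem g.f).toNat := rfl
    omega
  have ednd : (g.e.reg .r9).toNat = g.dnd := rfl
  have eRA : (g.e.reg .rsp).toNat = g.RA := rfl
  have w_rip := hrip
  have h_rsp := c.rsp
  have h_rbp := c.rbp
  have h_r12 : v.reg .r12 = UInt64.ofNat g.f := by
    rw [core.r12]
    exact eq_addr _ _ rfl
  have h_r15 := core.r15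
  have w_eq : Mem.EqOn Vorbis.L.textLo Vorbis.L.textHi u₀.mem v.mem := c.code
  have hdf : v.flags .df = false := (show abiInv _ from c.inv).1
  have hmx : v.mxcsr &&& 0x1F80 = 0x1F80 := (show abiInv _ from c.inv).2
  have hsse := Vorbis.sseOK_of_abiInv c.inv
  have f_ch := c.fr_ch
  have f_dnd := core.path.sl_dnd
  have f_r := core.sl_r
  have hj31 : j < 2 ^ 31 := by omega
  have hch31 : g.ch < 2 ^ 31 := by omega
  have hbits : Bits g.Blk g.len v.mem g.f := c.point.vorbis.bits
  have hL : BlkLive g.Blk g.Live' := c.point.env.live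
  -- the flag byte `do_not_decode[j]`, named before the walk (in the form in which the walker builds its address)
  obtain ⟨d, l_d⟩ : ∃ d, v.mem.readLE (g.e.reg .r9 +
      Word.ofBV (BitVec.signExtend 64 (Word.part .w32 (UInt64.ofNat j)))) 1 = d := ⟨_, rfl⟩
  have hd : d = v.mem.u8 (g.dnd + j) := by
    rw [← l_d, part32_ofNat j (by omega), sext_small j hj31]
    exact dnd_read g v.mem j
  have hdlt : d < 256 := by
    rw [hd]
    exact Mem.u8_lt _ _
  have l_d2 : v.mem.readLE (g.e.reg .r9 + UInt64.ofNat j) 1 = d := by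
    rw [← l_d, part32_ofNat j (by omega), sext_small j hj31]
  have hsx' : Word.ofBV (BitVec.signExtend 64 (Word.part .w32 (UInt64.ofNat j))) = UInt64.ofNat j := by
    rw [part32_ofNat j (by omega)]
    exact sext_small j hj31
  u_walk hcode [hμ.vendor, hsx'] until [Vorbis.L.decode_residue.cut28, Vorbis.L.decode_residue.cut29, pDec] span [Vorbis.L.textLo, Vorbis.L.textHi] side (v_side)
  all_goals simp only [part32_ofNat j (by omega), sext_small j hj31, sext_small_toNat j hj31] at *
  case check_10f7cc =>
    -- do_not_decode[j], j < ch (P2)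
    have hjlt := lt_of_not_jge hj31 hch31 hbr_10f7ae
    have hun : ShadowUntouched v.mem s_10f7cc.mem := by v_untouched
    have hl : LiveIn g.others' g.frames' g.dnd g.ch := hent.args.dnd_live.mono (objs_sub g)
    exact hl.accSmall c.shadow hun _ 1 (by decide) (by u_omega) (by u_omega)
  case check_10f7de =>
    -- f->codebooks (OB1)
    have hun : ShadowUntouched v.mem s_10f7de.mem := by v_untouched
    have hs := hbits.site_field hL 168 8 (by omega) (by omega) rfl
    exact Vorbis.Spec.check_site c.shadow hun hs (by u_omega)
  case check_10f7f6 =>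
    -- r->classbook (R2, P1)
    have hun : ShadowUntouched v.mem s_10f7f6.mem := by v_untouched
    have hres : ResidueOK g.Blk v.mem g.f := c.point.vorbis.residue
    have hs := hres.site_record hL (c.rn_lt hent) 13 1 (by simp only [voff]; omega) (by omega) rfl
    rw [c.config_at] at hs
    exact Vorbis.Spec.check_site c.shadow hun hs (by u_omega)
  · -- 0x10f7ae `jge` taken: j = ch, the loop is left (cut29)
    refine ReachVia.done (Or.inl (Or.inl ?_))
    have hge := ge_of_jge hj31 hch31 hbr_10f7ae
    have hs : Mem.SameExcept (scratch g) v.mem s_10f7ae.mem := by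
      rw [w_mem]
      exact Mem.SameExcept.refl _ _
    have hcore : LoopCore u₀ g cs pcount j s_10f7ae := by
      refine core_scratch hent core ?_ ?_ w_eq (by v_inv) ?_ ?_ hs ?_
      · rw [w_kept.get .rbp rfl]
        exact h_rbp
      · rw [w_kept.get .rsp rfl]
        exact h_rsp
      · rw [w_kept.get .r12 rfl]
        exact core.r12
      · rw [w_kept.get .r15 rfl]
        exact h_r15
      · intro j'' h1 h2
        omega
    exact at29_of_core (by rw [w_rip]; rfl) hcore hge
  · -- 0x10f7d4 `jne` taken: do_not_decode[j] ≠ 0, the latch, the head again with j + 1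
    refine ReachVia.done (Or.inr (Or.inl ?_))
    have hjlt := lt_of_not_jge hj31 hch31 hbr_10f7ae
    have hs : Mem.SameExcept (scratch g) v.mem s_10f7a1.mem := by
      rw [w_mem, scratch_def]
      u_same
    refine ⟨by rw [w_rip], ?_, by omega⟩
    refine core_scratch hent core ?_ w_rsp w_eq (by v_inv) ?_ ?_ hs ?_
    · rw [w_kept.get .rbp rfl]
      exact h_rbp
    · rw [w_kept.get .r12 rfl]
      exact core.r12
    · rw [w_r15]
      exact inc_small j hj31
    · intro j'' h1 h2 hrow
      exfalso
      have e : j'' = j := by omega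
      subst e
      apply hrow.2
      show g.e.mem.u8 (g.dnd + j'') ≠ 0
      rw [← c.dnd_same j'' hjlt, ← hd]
      omega
  · -- the channel is decoded: `c = f->codebooks + r->classbook` in r13 (pDec)
    refine ReachVia.done (Or.inr (Or.inr ?_))
    have hjlt := lt_of_not_jge hj31 hch31 hbr_10f7ae
    have hs : Mem.SameExcept (scratch g) v.mem s_10f806.mem := by
      rw [w_mem, scratch_def]
      u_same
    have hcore : LoopCore u₀ g cs pcount j s_10f806 := by
      refine core_scratch hent core ?_ w_rsp w_eq (by v_inv) ?_ ?_ hs ?_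
      · rw [w_kept.get .rbp rfl]
        exact h_rbp
      · rw [w_kept.get .r12 rfl]
        exact core.r12
      · rw [w_kept.get .r15 rfl]
        exact h_r15
      · intro j'' h1 h2
        omega
    refine ⟨by rw [w_rip], hcore, hjlt, ⟨hjlt, ?_⟩, ?_, ?_⟩
    · show ¬ g.e.mem.u8 (g.dnd + j) ≠ 0
      rw [← c.dnd_same j hjlt, ← hd]
      omega
    · rw [w_mem]
      u_read
    · rw [w_r13, zx8_word _ (Mem.readLE_lt' v.mem _ 1)]
      exact cb_eq c

/-- **Block 1** (0x10f809 … 0x10f81f, 0x10f6f0 … 0x10f6f8; C 2265): `if (f->valid_bits <= 9) prep_huffman(f)`. From `pDec` to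
`pAcc`: `Bits` and `μ` come from the callee's post, its footprint lies inside the step spans. -/
theorem blk1 {Lay : Layout} (hLay : Lay.hi = 0x1000000) {μ : Microarch} (hμ : UserX.MicroOK μ) {u₀ : State}
    (hcode : HasCodeNat Lay u₀ Vorbis.L.decode_residue.entry Vorbis.Code.code_decode_residue.nat Vorbis.L.decode_residue.size)
    (hprep : ∀ (others : List Obj) (frames : List (Nat × FrameLayout)) (Blk : Block → Prop) (len : Nat), Calls Lay μ Vorbis.WayInv (Vorbis.conv u₀) Vorbis.L.prep_huffman.entry (Vorbis.Spec.prep_huffman.spec others frames Blk len))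
    (hl4 : Asan.SmallCheck Lay μ Vorbis.WayInv (Vorbis.CodeOK u₀) [.rax, .rcx, .rdx] 4 Vorbis.L.__asan_load4_noabort.entry)
    {g : G} (hent : Entered u₀ g) {cs pcount : Nat} :
    ∀ j v, AtDec u₀ g cs pcount j v → ReachVia Lay μ WayInv v (fun v' => AtAcc u₀ g cs pcount j v') := by
  intro j v hat
  obtain ⟨hrip, body⟩ := hat
  have core := body.core
  have c := core.common
  have he := hent.entry
  v_entry he
  have hp := hprep g.others' g.frames' g.Blk g.len
  have hroom := hent.room
  have hwf := where_f hent
  have eRA : (g.e.reg .rsp).toNat = g.RA := rfl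
  have w_rip := hrip
  have h_rsp := c.rsp
  have h_rbp := c.rbp
  have h_r12 : v.reg .r12 = UInt64.ofNat g.f := by
    rw [core.r12]
    exact eq_addr _ _ rfl
  have w_eq : Mem.EqOn Vorbis.L.textLo Vorbis.L.textHi u₀.mem v.mem := c.code
  have hdf : v.flags .df = false := (show abiInv _ from c.inv).1
  have hmx : v.mxcsr &&& 0x1F80 = 0x1F80 := (show abiInv _ from c.inv).2
  have hsse := Vorbis.sseOK_of_abiInv c.inv
  have hbits : Bits g.Blk g.len v.mem g.f := c.point.vorbis.bits
  have hL : BlkLive g.Blk g.Live' := c.point.env.live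
  obtain ⟨vb, l_vb⟩ : ∃ vb, v.mem.readLE (UInt64.ofNat g.f + 1768) 4 = vb := ⟨_, rfl⟩
  u_walk hcode [hμ.vendor] until [pAcc] span [Vorbis.L.textLo, Vorbis.L.textHi] side (v_side)
  case check_10f811 =>
    -- f->valid_bits (OB1)
    have hun : ShadowUntouched v.mem s_10f811.mem := by v_untouched
    have hs := hbits.site_field hL 1768 4 (by omega) (by omega) rfl
    exact Vorbis.Spec.check_site c.shadow hun hs (by u_omega)
  case call_inv => v_inv
  case pre_10f6f3 =>
    -- prep_huffman's precondition: the shadow clause below the steady stack pointer, the readers' environment, `Bits f`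
    have hun : ShadowUntouched v.mem s_10f6f3.mem := by v_untouched
    have hsc : Mem.SameExcept (scratch g) v.mem s_10f6f3.mem := by
      rw [w_mem, scratch_def]
      u_same
    have e8 : (s_10f6f3.reg .rsp).toNat + 8 = g.RA - 248 := by
      rw [w_rsp]
      u_omega
    have hrdi : (s_10f6f3.reg .rdi).toNat = g.f := by
      rw [w_rdi]
      u_omega
    refine ⟨⟨?_, hent.offText'⟩, ?_, ?_⟩
    · rw [e8]
      exact c.shadow.untouched hun
    · rw [hrdi]
      exact hent.reader'
    · rw [hrdi]
      exact (step_of_scratch hent c hsc).2.1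
  · -- after prep_huffman (0x10f6f8 `jmp 10f825`)
    v_after_call w_rsp_10f6f3 w_mem_10f6f3
    obtain ⟨hf1, hf2, hf3⟩ := hwf
    have erdi : (UInt64.ofNat g.f).toNat = g.f := by u_omega
    simp only [w_rdi_10f6f3, erdi] at w_same
    have hp1 : s_10f6f3.mem.readLE (g.e.reg .rsp - 192) 8 = j := by
      rw [w_mem_10f6f3]
      u_frame body.sl_j
    rw [w_mem_10f6f3] at hp1
    have hs1 : s_10f6f3r.mem.readLE (g.e.reg .rsp - 192) 8 = j := by u_frame hp1
    have hsame : Mem.SameExcept (stepSpans g) v.mem s_10f6f3r.mem := by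
      rw [stepSpans_def]
      u_same
    have hpost : PrepHuffmanPost g.Blk g.len (s_10f6f3.reg .rdi).toNat s_10f6f3 s_10f6f3r := w_post
    rw [w_rdi_10f6f3, erdi] at hpost
    have hsc : Mem.SameExcept (scratch g) v.mem s_10f6f3.mem := by
      rw [w_mem_10f6f3, scratch_def]
      u_same
    have hmu0 := (step_of_scratch hent c hsc).2.2
    have hbody : LoopBody u₀ g cs pcount j s_10f6f3r := by
      refine body_step hent body ?_ w_rsp (Vorbis.conv_code_eqOn w_code) w_inv (w_kept.get .r12 rfl) (w_kept.get .r15 rfl)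
        (w_kept.get .r13 rfl) hs1 hsame hpost.reader.bits ?_
      · rw [w_kept.get .rbp rfl]
        exact h_rbp
      · rw [← hmu0]
        exact hpost.reader.mu_le
    have w_eq := Vorbis.conv_code_eqOn w_code
    have hdf' : s_10f6f3r.flags .df = false := w_inv.1
    have hmx' : s_10f6f3r.mxcsr &&& 0x1F80 = 0x1F80 := w_inv.2
    have k12 : s_10f6f3r.reg .r12 = v.reg .r12 := w_kept.get .r12 rfl
    have k13 : s_10f6f3r.reg .r13 = v.reg .r13 := w_kept.get .r13 rfl
    have k15 : s_10f6f3r.reg .r15 = v.reg .r15 := w_kept.get .r15 rfl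
    clear w_same w_post hpost hp1 hs1 hsame hsc hmu0
    u_walk hcode [hμ.vendor] until [pAcc] span [Vorbis.L.textLo, Vorbis.L.textHi] side (v_side)
    refine ReachVia.done ⟨by rw [w_rip], ?_⟩
    have hs : Mem.SameExcept (scratch g) s_10f6f3r.mem s_10f6f8.mem := by
      rw [w_mem]
      exact Mem.SameExcept.refl _ _
    refine body_scratch hent hbody ?_ w_rsp w_eq (by v_inv) ((w_kept.get .r12 rfl).trans k12.symm)
      ((w_kept.get .r15 rfl).trans k15.symm) ((w_kept.get .r13 rfl).trans k13.symm) ?_ hs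
    · rw [w_kept.get .rbp rfl]
      exact h_rbp
    · rw [w_mem]
      exact hbody.sl_j
  · -- valid_bits > 9: straight to pAcc
    refine ReachVia.done ⟨by rw [w_rip], ?_⟩
    have hs : Mem.SameExcept (scratch g) v.mem s_10f81f.mem := by
      rw [w_mem, scratch_def]
      u_same
    refine body_scratch hent body ?_ w_rsp w_eq (by v_inv) (w_kept.get .r12 rfl) (w_kept.get .r15 rfl) (w_kept.get .r13 rfl) ?_ hs
    · rw [w_kept.get .rbp rfl]
      exact h_rbp
    · rw [w_mem]
      u_frame body.sl_j

/-- `shl r, 2` is a multiplication by 4. -/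
theorem shl2_mul4 (w : Word) : w <<< 2 = w * 4 := by
  bv_decide

/-- The machine address of DECODE's translation load, `movsxd rbx,ebx ; shl rbx,2 ; add rbx,[c+0x838]`, is the number address
of `Codebook.sortedValue`. -/
theorem sv_addr (x : Word) (sv : Nat) (hv : -1 ≤ argInt x) (hsv : 4 ≤ sv) :
    Word.ofBV (BitVec.signExtend 64 (Word.part .w32 x)) <<< 2 + UInt64.ofNat sv =
      addr (sv - 4 + 4 * (argInt x + 1).toNat) := by
  have e : (Word.part .w32 x).toInt = argInt x := s32_eq_argInt x
  rw [shl2_mul4, ofBV_signExtend64, e, UInt64.add_comm]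
  exact addr_add_word_mul4 sv _ hv hsv

/-- `mov ebx, DWORD PTR [rbx]`: the register's signed value is the `int` read. -/
theorem argInt_load (m : Mem) (A : Nat) : argInt (Word.ofBV (BitVec.ofNat 32 (m.readLE (addr A) 4))) = m.i32 A := by
  have hlt : m.readLE (addr A) 4 < 2 ^ 32 := Mem.u32_lt m A
  unfold argInt
  rw [toNat_ofBV32, BitVec.toNat_ofNat, Nat.mod_mod, Nat.mod_eq_of_lt hlt]
  rfl

/-- `CodebookOK` of the class book in the entry memory. -/
theorem cb_ok_e {u₀ : State} {g : G} (hent : Entered u₀ g) : CodebookOK g.Blk g.e.mem (clsBook g) := by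
  have hR : ResidueOK g.Blk g.e.mem g.f := hent.vorbis.residue
  have hrec : ResidueAtOK g.Blk g.e.mem g.f g.r := hR.record g.rn hent.args.rn_lt
  exact hent.vorbis.config.books (Residue.classbook g.e.mem g.r) hrec.R7

/-- **Block 3** (0x10f70a … 0x10f73c; C 2265): the translation `if (c->sparse) temp = c->sorted_values[temp]` of DECODE, also for
`temp = −1` (the sentinel word before the table). From `pRaw` to `pTemp`. -/
theorem blk3 {Lay : Layout} (hLay : Lay.hi = 0x1000000) {μ : Microarch} (hμ : UserX.MicroOK μ) {u₀ : State}
    (hcode : HasCodeNat Lay u₀ Vorbis.L.decode_residue.entry Vorbis.Code.code_decode_residue.nat Vorbis.L.decode_residue.size)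
    (hl1 : Asan.SmallCheck Lay μ Vorbis.WayInv (Vorbis.CodeOK u₀) [.rax, .rdx] 1 Vorbis.L.__asan_load1_noabort.entry)
    (hl8 : Asan.SmallCheck Lay μ Vorbis.WayInv (Vorbis.CodeOK u₀) [.rax, .rcx, .rdx] 8 Vorbis.L.__asan_load8_noabort.entry)
    (hl4 : Asan.SmallCheck Lay μ Vorbis.WayInv (Vorbis.CodeOK u₀) [.rax, .rcx, .rdx] 4 Vorbis.L.__asan_load4_noabort.entry)
    {g : G} (hent : Entered u₀ g) {cs pcount : Nat} :
    ∀ j v, AtRaw u₀ g cs pcount j v → ReachVia Lay μ WayInv v (fun v' => AtTemp u₀ g cs pcount j v') := by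
  intro j v hat
  obtain ⟨hrip, body, res⟩ := hat
  have core := body.core
  have c := core.common
  have he := hent.entry
  v_entry he
  have hroom := hent.room
  have hwc := where_cb hent
  have eRA : (g.e.reg .rsp).toNat = g.RA := rfl
  have w_rip := hrip
  have h_rsp := c.rsp
  have h_rbp := c.rbp
  have h_r13 := body.r13
  have w_eq : Mem.EqOn Vorbis.L.textLo Vorbis.L.textHi u₀.mem v.mem := c.code
  have hdf : v.flags .df = false := (show abiInv _ from c.inv).1
  have hmx : v.mxcsr &&& 0x1F80 = 0x1F80 := (show abiInv _ from c.inv).2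
  have hsse := Vorbis.sseOK_of_abiInv c.inv
  have hL : BlkLive g.Blk g.Live' := c.point.env.live
  have hcb := cb_ok hent c
  obtain ⟨x, h_rbx⟩ : ∃ x, v.reg .rbx = x := ⟨_, rfl⟩
  rw [h_rbx] at res
  obtain ⟨sp, l_sp⟩ : ∃ sp, v.mem.readLE (UInt64.ofNat (clsBook g) + 27) 1 = sp := ⟨_, rfl⟩
  obtain ⟨sv, l_sv⟩ : ∃ sv, v.mem.readLE (UInt64.ofNat (clsBook g) + 2104) 8 = sv := ⟨_, rfl⟩
  u_walk hcode [hμ.vendor] until [pTemp] span [Vorbis.L.textLo, Vorbis.L.textHi] side (v_side)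
  case check_10f70e =>
    -- c->sparse
    have hun : ShadowUntouched v.mem s_10f70e.mem := by v_untouched
    exact Vorbis.Spec.check_site c.shadow hun (site_cb hent c 27 1 (by omega) (by omega)) (by u_omega)
  case check_10f721 =>
    -- c->sorted_values
    have hun : ShadowUntouched v.mem s_10f721.mem := by v_untouched
    exact Vorbis.Spec.check_site c.shadow hun (site_cb hent c 2104 8 (by omega) (by omega)) (by u_omega)
  case check_10f737 =>
    -- c->sorted_values[var], var ∈ {−1} ∪ [0, se) (K4 with the sentinel)
    have hun : ShadowUntouched v.mem s_10f737.mem := by v_untouched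
    have sf := cb_fields hent c
    have hsp : sp = Codebook.sparse v.mem (clsBook g) := by
      rw [← l_sp]
      simp only [vacc, voff]
      unfold Mem.u8
      rw [← addr_add_lit]
      rfl
    have hsv : sv = Codebook.sorted_values v.mem (clsBook g) := by
      rw [← l_sv]
      simp only [vacc, voff]
      unfold Mem.u64
      rw [← addr_add_lit]
      rfl
    have hsparse : Codebook.sparse v.mem (clsBook g) ≠ 0 := by
      have := Mem.u8_lt v.mem (clsBook g + 27)
      rw [← hsp]
      have hlt : sp < 256 := by
        rw [← l_sp]
        exact Mem.readLE_lt' _ _ 1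
      omega
    have resv : DecodeRawResult v.mem (clsBook g) (argInt x) := by
      unfold DecodeRawResult
      rw [sf.N]
      exact res
    have hs := hcb.site_sortedValue hL hsparse resv rfl
    have hge := hcb.sorted_values_ge hent.pre.env.ok (hcb.se_pos_of_sparse hsparse)
    have hm1 : -1 ≤ argInt x := by
      rcases resv with h | h
      · omega
      · omega
    have hin := hs.inside c.point.env.covers
    rw [sv_addr x sv hm1 (by omega), hsv]
    exact Vorbis.Spec.check_site c.shadow hun hs (toNat_addr _ (by omega))
  · -- 0x10f718 `je` taken: the book is dense, `temp` is the raw result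
    refine ReachVia.done ⟨by rw [w_rip], ?_, ?_⟩
    · have hs : Mem.SameExcept (scratch g) v.mem s_10f718.mem := by
        rw [w_mem, scratch_def]
        u_same
      refine body_scratch hent body ?_ w_rsp w_eq (by v_inv) (w_kept.get .r12 rfl) (w_kept.get .r15 rfl)
        (w_kept.get .r13 rfl) ?_ hs
      · rw [w_kept.get .rbp rfl]
        exact h_rbp
      · rw [w_mem]
        u_frame body.sl_j
    · rw [w_kept.get .rbx rfl, h_rbx]
      have sf := cb_fields hent c
      have hsp : sp = Codebook.sparse v.mem (clsBook g) := by
        rw [← l_sp]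
        simp only [vacc, voff]
        unfold Mem.u8
        rw [← addr_add_lit]
        rfl
      have hlt : sp < 256 := by
        rw [← l_sp]
        exact Mem.readLE_lt' _ _ 1
      have hdense : Codebook.sparse g.e.mem (clsBook g) = 0 := by
        rw [← sf.sparse, ← hsp]
        omega
      exact (cb_ok_e hent).decode_dense hdense res
  · -- the book is sparse: `temp = c->sorted_values[var]`, also for var = −1 (the sentinel)
    have sf := cb_fields hent c
    have hsp : sp = Codebook.sparse v.mem (clsBook g) := by
      rw [← l_sp]
      simp only [vacc, voff]
      unfold Mem.u8
      rw [← addr_add_lit]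
      rfl
    have hsv : sv = Codebook.sorted_values v.mem (clsBook g) := by
      rw [← l_sv]
      simp only [vacc, voff]
      unfold Mem.u64
      rw [← addr_add_lit]
      rfl
    have hlt : sp < 256 := by
      rw [← l_sp]
      exact Mem.readLE_lt' _ _ 1
    have hsparse : Codebook.sparse v.mem (clsBook g) ≠ 0 := by
      rw [← hsp]
      omega
    have resv : DecodeRawResult v.mem (clsBook g) (argInt x) := by
      unfold DecodeRawResult
      rw [sf.N]
      exact res
    have hse := hcb.se_pos_of_sparse hsparse
    have hs := hcb.site_sortedValue hL hsparse resv rfl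
    have hge := hcb.sorted_values_ge hent.pre.env.ok hse
    have hm1 : -1 ≤ argInt x := by
      rcases resv with h | h
      · omega
      · omega
    have hin := hs.inside c.point.env.covers
    have hwb := where_blk hent (hcb.K4.sv hse)
    have hN := Codebook.N_sparse (mem := v.mem) (c := clsBook g) hsparse
    have hoff : Codebook.sorted_values v.mem (clsBook g) - 4 + 4 * (argInt x + 1).toNat + 4 ≤ 0x700000 ∨
        0x800000 ≤ Codebook.sorted_values v.mem (clsBook g) - 4 + 4 * (argInt x + 1).toNat := by
      simp only [] at hwb
      rcases resv with h | h
      · omega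
      · omega
    rw [sv_addr x sv hm1 (by omega), hsv] at w_rbx
    generalize hA : Codebook.sorted_values v.mem (clsBook g) - 4 + 4 * (argInt x + 1).toNat = A at *
    have hAn : (addr A).toNat = A := toNat_addr _ (by omega)
    obtain ⟨y, hy⟩ : ∃ y, v.mem.readLE (addr A) 4 = y := ⟨_, rfl⟩
    have hrd : (v.mem.writeLE (g.e.reg .rsp - 256) 8 1111868).readLE (addr A) 4 = y := by
      u_read
    rw [hrd] at w_rbx
    refine ReachVia.done ⟨by rw [w_rip], ?_, ?_⟩
    · have hs : Mem.SameExcept (scratch g) v.mem s_10f73c.mem := by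
        rw [w_mem, scratch_def]
        u_same
      refine body_scratch hent body ?_ w_rsp w_eq (by v_inv) (w_kept.get .r12 rfl) (w_kept.get .r15 rfl)
        (w_kept.get .r13 rfl) ?_ hs
      · rw [w_kept.get .rbp rfl]
        exact h_rbp
      · rw [w_mem]
        u_frame body.sl_j
    · rw [w_rbx, ← hy, argInt_load]
      have hd := hcb.decode_sparse hent.pre.env.ok hsparse resv
      unfold Codebook.sortedValue at hd
      rw [hA] at hd
      unfold DecodeResult at hd ⊢
      rw [← sf.entries]
      exact hd

/-- `shl r, 3` is a multiplication by 8. -/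
theorem shl3_mul8 (w : Word) : w <<< 3 = w * 8 := by
  bv_decide

/-- `cmp ebx, -1 ; je` not taken: the signed value is not −1. -/
theorem ne_m1 (x : Word) (h : ¬(Word.part Width.w32 x).toNat = 4294967295 % 2 ^ Width.w32.bits) : argInt x ≠ -1 := by
  intro hx
  apply h
  have e : (4294967295 % 2 ^ Width.w32.bits) = 4294967295 := by decide
  rw [e, toNat_part32]
  unfold argInt at hx
  have hlt : x.toNat % 2 ^ 32 < 2 ^ 32 := Nat.mod_lt _ (by decide)
  have := sint32_cases (x.toNat % 2 ^ 32)
  omega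

/-- `cmp ebx, -1 ; je` taken: the signed value is −1. -/
theorem eq_m1 (x : Word) (h : (Word.part Width.w32 x).toNat = 4294967295 % 2 ^ Width.w32.bits) : argInt x = -1 := by
  have e : (4294967295 % 2 ^ Width.w32.bits) = 4294967295 := by decide
  rw [e, toNat_part32] at h
  unfold argInt
  rw [h]
  rfl

/-- `movsxd rbx,ebx ; shl rbx,3 ; add rbx,[p]`: the address of element `q` (a non-negative int) of an array of pointers. -/
theorem el8_addr (x : Word) (base q : Nat) (hq : argInt x = (q : Int)) :
    Word.ofBV (BitVec.signExtend 64 (Word.part .w32 x)) <<< 3 + UInt64.ofNat base = addr (base + 8 * q) := by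
  have e : (Word.part .w32 x).toInt = argInt x := s32_eq_argInt x
  have e8 : (8 : Word) = addr 8 := rfl
  have eb : UInt64.ofNat base = addr base := rfl
  rw [shl3_mul8, ofBV_signExtend64, e, hq, word_nonneg _ (Int.natCast_nonneg _), Int.toNat_natCast, e8, eb, addr_mul_addr,
    addr_add_addr]
  congr 1
  omega

/-- `movsxd r13,[class_set] ; shl r13,3 ; add r13,[row]`: the slot's address. -/
theorem slot8_addr (cs rowp : Nat) (hcs : cs < 2 ^ 31) :
    Word.ofBV (BitVec.signExtend 64 (BitVec.ofNat 32 cs)) <<< 3 + UInt64.ofNat rowp = addr (rowp + 8 * cs) := by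
  have e8 : (8 : Word) = addr 8 := rfl
  have eb : UInt64.ofNat rowp = addr rowp := rfl
  have ec : UInt64.ofNat cs = addr cs := rfl
  rw [sext_small cs hcs, shl3_mul8, e8, eb, ec, addr_mul_addr, addr_add_addr]
  congr 1
  omega


/-- Where a slot of the temp block is: after the row-pointer table, inside the block, hence off the stack, off `*f`, inside the
free part of the arena. -/
theorem where_slot {u₀ : State} {g : G} {v : State} (c : Common u₀ g v) {j cs : Nat} (hj : j < g.C)
    (hcs : cs < g.PRD) :
    g.TB.base + 8 * g.C ≤ slot g.TB g.C g.PRD j cs ∧ slot g.TB g.C g.PRD j cs + 8 ≤ g.TB.base + g.TB.size ∧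
      g.A.B + g.A.S ≤ g.TB.base ∧ g.TB.base + g.TB.size ≤ g.A.B + g.A.L := by
  have hin := slot_inside g.TB hj hcs c.tb.size
  have hb : ADOBusy g.A' g.others' v.mem g.f g.sz := c.point.busy
  have hr := hb.ok.tblock_range c.tblock
  have h2 := hb.ok.AR2
  have hle := le_r8 g.TB.size
  have eB : g.A'.B = g.A.B := rfl
  have eL : g.A'.L = g.A.L := rfl
  have eS : g.A'.S = g.A.S := rfl
  rw [eB, eL] at hr
  rw [eS] at h2
  omega

/-- **`LoopCore` for the next counter after the store of pass 0**, `part_classdata[j][class_set] = r->classdata[temp]`: the memory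
is the present one with scratch stores (`m1`: the return addresses of the check calls) and then the ONE store of a row pointer
into the slot `(j, class_set)` of the temp block. -/
theorem core_store {u₀ : State} {g : G} (hent : Entered u₀ g) {cs pcount j : Nat} {v v2 : State}
    (h : LoopCore u₀ g cs pcount j v) (hrow : g.rowsB j) {m1 : Mem} (hs1 : Mem.SameExcept (scratch g) v.mem m1)
    (hrbp : v2.reg .rbp = g.e.reg .rsp - 8) (hrsp : v2.reg .rsp = g.e.reg .rsp - 248)
    (code : CodeOK u₀ v2.mem) (inv : abiInv v2) (hr12 : v2.reg .r12 = g.e.reg .rdi)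
    (hr15 : v2.reg .r15 = UInt64.ofNat (j + 1)) (val : Nat) (hvlt : val < 2 ^ 64) (hval : RowPtr m1 g.f g.r val)
    (hmem : v2.mem = m1.writeLE (addr (slot g.TB g.C g.PRD j cs)) 8 val) : LoopCore u₀ g cs pcount (j + 1) v2 := by
  have hroom := hent.room
  have hwf := where_f hent
  have hch : g.ch ≤ g.C := hent.args.ch_le
  have hjC : j < g.C := by
    have := hrow.1
    omega
  have hW := h.common.w_pos hent
  have hcs : cs < g.PRD := h.wb.slot_lt hW h.lt
  -- stage 1: the scratch stores, as a state
  have hcode1 : CodeOK u₀ m1 := by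
    have h0 : Mem.EqOn L.textLo L.textHi u₀.mem v.mem := h.common.code
    exact h0.trans (hs1.eqOn _ _ (scratch_off hent _ _ (by decide)))
  have hinv1 : abiInv (v.setMem m1) := h.common.inv
  have h1 : LoopCore u₀ g cs pcount j (v.setMem m1) :=
    core_scratch hent h h.common.rbp h.common.rsp hcode1 hinv1 h.r12 h.r15 hs1 (fun j'' h1 h2 => by omega)
  have c1 := h1.common
  have hwt := where_tb c1
  have htf := tb_off_f hent c1
  have hws := where_slot c1 hjC hcs
  generalize hsl : slot g.TB g.C g.PRD j cs = sl at *
  have esl : (addr sl).toNat = sl := toNat_addr _ (by omega)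
  -- stage 2: the one store
  have hs2 : Mem.SameExcept [⟨sl, sl + 8⟩] m1 v2.mem := by
    rw [hmem]
    apply Mem.SameExcept.writeLE _ _ _ _ _ (by omega)
    exact ⟨_, List.mem_singleton.mpr rfl, by rw [esl]; exact Nat.le_refl _, by rw [esl]; exact Nat.le_refl _⟩
  have off2 : ∀ lo hi : Nat, (hi ≤ sl ∨ sl + 8 ≤ lo) → ∀ w, w ∈ [(⟨sl, sl + 8⟩ : Span)] → hi ≤ w.lo ∨ w.hi ≤ lo := by
    intro lo hi hd w hw
    have e : w = ⟨sl, sl + 8⟩ := List.mem_singleton.mp hw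
    subst e
    simp only []
    omega
  have rd2 : ∀ (k n : Nat), k ≤ 256 → n ≤ k →
      v2.mem.readLE (g.e.reg .rsp - UInt64.ofNat k) n = m1.readLE (g.e.reg .rsp - UInt64.ofNat k) n := by
    intro k n hk hn
    have eR : (g.e.reg .rsp).toNat = g.RA := rfl
    have ea : (g.e.reg .rsp - UInt64.ofNat k).toNat = g.RA - k := by
      rw [UInt64.toNat_sub_of_le _ _ (by rw [UInt64.le_iff_toNat_le, UInt64.toNat_ofNat']; omega), UInt64.toNat_ofNat']
      omega
    apply hs2.readLE _ _ (by omega)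
    rw [ea]
    exact off2 _ _ (by omega)
  have hun : ShadowUntouched m1 v2.mem := hs2.eqOn 0xC00000 0xE00000 (off2 _ _ (by omega))
  have hobj : ObjSame g.f m1 v2.mem := by
    apply ObjSame.of_sameExcept hs2 (by simp only [voff]; omega)
    intro w hw
    have := off2 g.f (g.f + 1808) (by omega) w hw
    omega
  have hbits : Bits g.Blk g.len v2.mem g.f := c1.point.vorbis.bits.frame hobj
  have hmu : mu v2.mem g.f = mu m1 g.f := mu_transfer (hobj.sub (by decide))
  have hado : ObjEq ADO.wins m1 g.f v2.mem g.f := by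
    apply ObjEq.of_sameExcept hs2
    · intro w hw
      simp only [ADO.wins, List.mem_cons, List.mem_nil_iff, or_false] at hw
      rcases hw with rfl | rfl <;> simp only [] <;> omega
    · intro w hw s hsp
      simp only [ADO.wins, List.mem_cons, List.mem_nil_iff, or_false] at hw
      have := off2 g.f (g.f + 1808) (by omega) s hsp
      rcases hw with rfl | rfl <;> simp only [] <;> omega
  have hbusy : ADOBusy g.A' g.others' v2.mem g.f g.sz :=
    (show ADOBusy g.A' g.others' m1 g.f g.sz from c1.point.busy).transfer hado
  have htb : TempRows v2.mem g.TB g.C g.PRD := by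
    rw [hmem, ← hsl]
    exact c1.tb.store_slot hjC hcs val (by omega)
  have hsame : Mem.SameExcept (g.spec.footprint g.e) g.e.mem v2.mem := by
    apply c1.same.step_same hs2
    intro w hw a ha1 ha2
    have e : w = ⟨sl, sl + 8⟩ := List.mem_singleton.mp hw
    subst e
    simp only [] at ha1 ha2
    refine ⟨⟨g.A.B + g.A.S, g.A.B + g.A.L⟩, ?_, ?_⟩
    · unfold Spec.footprint
      show _ ∈ _ :: DecodeResidue.writes g.A g.e
      unfold DecodeResidue.writes
      simp
    · simp only []
      omega
  have c2 : Common u₀ g v2 := by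
    refine Common.of_frame hent hrbp hrsp code inv ?_ ?_ ?_ ?_ ?_ ?_ ?_ ?_ ?_ ?_ ?_ ?_ ?_ ?_ hsame (c1.shadow.untouched hun) hbits hbusy htb ?_
    · rw [show v2.mem.readLE (g.e.reg .rsp - 8) 8 = m1.readLE (g.e.reg .rsp - 8) 8 from rd2 8 8 (by omega) (by omega)]
      exact c1.s_rbp
    · rw [show v2.mem.readLE (g.e.reg .rsp - 16) 8 = m1.readLE (g.e.reg .rsp - 16) 8 from rd2 16 8 (by omega) (by omega)]
      exact c1.s_r15
    · rw [show v2.mem.readLE (g.e.reg .rsp - 24) 8 = m1.readLE (g.e.reg .rsp - 24) 8 from rd2 24 8 (by omega) (by omega)]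
      exact c1.s_r14
    · rw [show v2.mem.readLE (g.e.reg .rsp - 32) 8 = m1.readLE (g.e.reg .rsp - 32) 8 from rd2 32 8 (by omega) (by omega)]
      exact c1.s_r13
    · rw [show v2.mem.readLE (g.e.reg .rsp - 40) 8 = m1.readLE (g.e.reg .rsp - 40) 8 from rd2 40 8 (by omega) (by omega)]
      exact c1.s_r12
    · rw [show v2.mem.readLE (g.e.reg .rsp - 48) 8 = m1.readLE (g.e.reg .rsp - 48) 8 from rd2 48 8 (by omega) (by omega)]
      exact c1.s_rbx
    · rw [show v2.mem.readLE (g.e.reg .rsp - 184) 8 = m1.readLE (g.e.reg .rsp - 184) 8 from rd2 184 8 (by omega) (by omega)]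
      exact c1.fr_f
    · rw [show v2.mem.readLE (g.e.reg .rsp - 216) 8 = m1.readLE (g.e.reg .rsp - 216) 8 from rd2 216 8 (by omega) (by omega)]
      exact c1.fr_rb
    · rw [show v2.mem.readLE (g.e.reg .rsp - 156) 4 = m1.readLE (g.e.reg .rsp - 156) 4 from rd2 156 4 (by omega) (by omega)]
      exact c1.fr_ch
    · rw [show v2.mem.readLE (g.e.reg .rsp - 196) 4 = m1.readLE (g.e.reg .rsp - 196) 4 from rd2 196 4 (by omega) (by omega)]
      exact c1.fr_prd
    · rw [show v2.mem.readLE (g.e.reg .rsp - 200) 4 = m1.readLE (g.e.reg .rsp - 200) 4 from rd2 200 4 (by omega) (by omega)]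
      exact c1.fr_w
    · rw [show v2.mem.readLE (g.e.reg .rsp - 232) 4 = m1.readLE (g.e.reg .rsp - 232) 4 from rd2 232 4 (by omega) (by omega)]
      exact c1.fr_rtype
    · rw [show v2.mem.readLE (g.e.reg .rsp - 176) 8 = m1.readLE (g.e.reg .rsp - 176) 8 from rd2 176 8 (by omega) (by omega)]
      exact c1.fr_pcd
    · rw [show v2.mem.readLE (g.e.reg .rsp - 240) 8 = m1.readLE (g.e.reg .rsp - 240) 8 from rd2 240 8 (by omega) (by omega)]
      exact c1.fr_si
    · rw [hmu]
      exact c1.mu_le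
  -- row pointers stay row pointers
  have hrp : ∀ w, RowPtr m1 g.f g.r w → RowPtr v2.mem g.f g.r w := by
    intro w hw
    have c1' : Common u₀ g (v.setMem m1) := h1.common
    apply hw.frame (reads_between c1' c2)
    have hB : g.Blk ⟨Residue.classdata m1 g.r, 8 * Residue.E m1 g.f g.r⟩ := (c1'.resAt hent).R8a
    have hgap := hent.pre.free.offGap _ hB
    have hin := hent.pre.env.ok.inside _ hB
    simp only [] at hgap hin
    apply Block.Kept.of_sameExcept hs2
    · exact off2 _ _ (by simp only []; omega)
    · simp only []
      omega
  -- every fill survives, the slot written holds a row pointer now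
  have hfill : ∀ j' m, j' < g.C → m ≤ g.PRD → Fill m1 g.f g.r g.TB g.C g.PRD j' m → Fill v2.mem g.f g.r g.TB g.C g.PRD j' m := by
    intro j' m hj' hm hf cs' hcs'
    by_cases e : j' = j ∧ cs' = cs
    · rw [e.1, e.2, hsl, hmem, Mem.ptr_writeLE_same, Nat.mod_eq_of_lt hvlt]
      rw [← hmem]
      exact hrp val hval
    · have hd := slot_disjoint g.TB (C := g.C) (j := j') (j' := j) (by omega : cs' < g.PRD) hcs (by omega)
      have hin' := slot_inside g.TB hj' (by omega : cs' < g.PRD) c1.tb.size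
      rw [hsl] at hd
      have hk : v2.mem.ptr (slot g.TB g.C g.PRD j' cs') = m1.ptr (slot g.TB g.C g.PRD j' cs') := by
        rw [hmem]
        apply Mem.ptr_writeLE
        · omega
        · omega
        · omega
      rw [hk]
      exact hrp _ (hf cs' hcs')
  refine ⟨c2, ⟨h.path.pathB, ?_, ?_, ?_⟩, hr12, hr15, ?_, ?_, ?_, ?_, h.lt, ?_⟩
  · rw [show v2.mem.readLE (g.e.reg .rsp - 168) 8 = m1.readLE (g.e.reg .rsp - 168) 8 from rd2 168 8 (by omega) (by omega)]
    exact h1.path.sl_dnd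
  · rw [show v2.mem.readLE (g.e.reg .rsp - 160) 4 = m1.readLE (g.e.reg .rsp - 160) 4 from rd2 160 4 (by omega) (by omega)]
    exact h1.path.sl_cs
  · rw [show v2.mem.readLE (g.e.reg .rsp - 244) 4 = m1.readLE (g.e.reg .rsp - 244) 4 from rd2 244 4 (by omega) (by omega)]
    exact h1.path.sl_tap
  · rw [show v2.mem.readLE (g.e.reg .rsp - 208) 8 = m1.readLE (g.e.reg .rsp - 208) 8 from rd2 208 8 (by omega) (by omega)]
    exact h1.sl_r
  · rw [show v2.mem.readLE (g.e.reg .rsp - 228) 4 = m1.readLE (g.e.reg .rsp - 228) 4 from rd2 228 4 (by omega) (by omega)]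
    exact h1.sl_pass
  · rw [show v2.mem.readLE (g.e.reg .rsp - 248) 4 = m1.readLE (g.e.reg .rsp - 248) 4 from rd2 248 4 (by omega) (by omega)]
    exact h1.sl_pcount
  · apply h1.wb.frame (fun _ hj => hj) ?_ hW
    intro j' m hr hf hm
    exact hfill j' m (by have := hr.1; omega) hm hf
  · intro j'' hj'' hr
    by_cases hlt : j'' < j
    · exact hfill j'' (cs + 1) (by have := hr.1; omega) (by omega) (h1.fill j'' hlt hr)
    · have e : j'' = j := by omega
      subst e
      have hf0 : Fill m1 g.f g.r g.TB g.C g.PRD j'' cs := h1.wb.fill0 rfl j'' hr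
      intro cs' hcs'
      by_cases e2 : cs' = cs
      · rw [e2, hsl, hmem, Mem.ptr_writeLE_same, Nat.mod_eq_of_lt hvlt]
        rw [← hmem]
        exact hrp val hval
      · exact hfill j'' cs hjC (by omega) hf0 cs' (by omega)


/-- **Block 4** (0x10f73e … 0x10f7a1; C 2266–2268, 2261): `if (temp == EOP) goto done` (the trampoline `cut39`), else
`part_classdata[j][class_set] = r->classdata[temp]`, `++j`, the head again. -/
theorem blk4 {Lay : Layout} (hLay : Lay.hi = 0x1000000) {μ : Microarch} (hμ : UserX.MicroOK μ) {u₀ : State}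
    (hcode : HasCodeNat Lay u₀ Vorbis.L.decode_residue.entry Vorbis.Code.code_decode_residue.nat Vorbis.L.decode_residue.size)
    (hl8 : Asan.SmallCheck Lay μ Vorbis.WayInv (Vorbis.CodeOK u₀) [.rax, .rcx, .rdx] 8 Vorbis.L.__asan_load8_noabort.entry)
    (hs8 : Asan.SmallCheck Lay μ Vorbis.WayInv (Vorbis.CodeOK u₀) [.rax, .rcx, .rdx] 8 Vorbis.L.__asan_store8_noabort.entry)
    {g : G} (hent : Entered u₀ g) {cs pcount : Nat} :
    ∀ j v, AtTemp u₀ g cs pcount j v → ReachVia Lay μ WayInv v (fun v' =>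
      Exit u₀ g cs pcount v' ∨ Head u₀ g cs pcount (j + 1) v') := by
  intro j v hat
  obtain ⟨hrip, body, res⟩ := hat
  have core := body.core
  have c := core.common
  have he := hent.entry
  v_entry he
  have hroom := hent.room
  have hwr := where_r hent
  have hwt := where_tb c
  have eRA : (g.e.reg .rsp).toNat = g.RA := rfl
  have w_rip := hrip
  have h_rsp := c.rsp
  have h_rbp := c.rbp
  have h_r15 := core.r15
  have w_eq : Mem.EqOn Vorbis.L.textLo Vorbis.L.textHi u₀.mem v.mem := c.code
  have hdf : v.flags .df = false := (show abiInv _ from c.inv).1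
  have hmx : v.mxcsr &&& 0x1F80 = 0x1F80 := (show abiInv _ from c.inv).2
  have hsse := Vorbis.sseOK_of_abiInv c.inv
  have hL : BlkLive g.Blk g.Live' := c.point.env.live
  obtain ⟨x, h_rbx⟩ : ∃ x, v.reg .rbx = x := ⟨_, rfl⟩
  rw [h_rbx] at res
  have f_r := core.sl_r
  have f_pcd := c.fr_pcd
  have f_j := body.sl_j
  have f_cs := core.path.sl_cs
  obtain ⟨cd, l_cd⟩ : ∃ cd, v.mem.readLE (UInt64.ofNat g.r + 16) 8 = cd := ⟨_, rfl⟩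
  obtain ⟨rowp, l_row⟩ : ∃ rowp, v.mem.readLE (UInt64.ofNat g.TB.base + UInt64.ofNat j * 8) 8 = rowp := ⟨_, rfl⟩
  -- the geometry of the temp block
  have hch : g.ch ≤ g.C := hent.args.ch_le
  have hjC : j < g.C := by
    have := body.j_lt
    omega
  have hW := c.w_pos hent
  have hcsP : cs < g.PRD := core.wb.slot_lt hW core.lt
  have hsz := c.tb.size
  have h3 : g.C * (8 + 8 * g.PRD) = g.C * 8 + g.C * (8 * g.PRD) := Nat.mul_add _ _ _
  have hP : 8 + 8 * g.PRD ≤ g.TB.size := by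
    rw [hsz]
    exact Nat.le_mul_of_pos_left _ (by omega)
  have hjb : g.TB.base + 8 * j + 8 ≤ g.TB.base + g.TB.size := by omega
  have hcs31 : cs < 2 ^ 31 := by omega
  have hj31 : j < 2 ^ 31 := by omega
  have erow : UInt64.ofNat g.TB.base + UInt64.ofNat j * 8 = addr (g.TB.base + 8 * j) := by
    have e8 : (8 : Word) = addr 8 := rfl
    show addr _ + addr j * 8 = _
    rw [e8, addr_mul_addr, addr_add_addr]
    congr 1
    omega
  have hrowp : rowp = rowBase g.TB g.C g.PRD j := by
    rw [← l_row, erow, ← c.tb.rows j hjC]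
    rfl
  have hws := where_slot c hjC hcsP
  have htx : 0x119d40 ≤ g.A.B := hent.pre.arenaText
  have hTB : g.TB.live g.Live' := by
    have hb : ADOBusy g.A' g.others' v.mem g.f g.sz := c.point.busy
    exact hb.ok.tblock_live_inv c.shadow c.tblock
  have hslot : Word.ofBV (BitVec.signExtend 64 (BitVec.ofNat 32 cs)) <<< 3 + UInt64.ofNat rowp =
      addr (slot g.TB g.C g.PRD j cs) := by
    rw [slot8_addr cs rowp hcs31, hrowp]
    rfl
  -- the `classdata` table
  have hcd : cd = Residue.classdata v.mem g.r := by
    rw [← l_cd]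
    simp only [vacc, voff]
    unfold Mem.u64
    rw [← addr_add_lit]
    rfl
  have sf := cb_fields hent c
  have hK : argInt x ≠ -1 → ∃ q val : Nat,
      Word.ofBV (BitVec.signExtend 64 (Word.part .w32 x)) <<< 3 + UInt64.ofNat cd = addr (cd + 8 * q) ∧
      Site g.Live' (cd + 8 * q) 8 ∧
      (0x100000 ≤ cd + 8 * q ∧ cd + 8 * q + 8 ≤ 0xC00000 ∧ (cd + 8 * q + 8 ≤ 0x700000 ∨ 0x800000 ≤ cd + 8 * q)) ∧
      v.mem.readLE (addr (cd + 8 * q)) 8 = val ∧ RowPtr v.mem g.f g.r val ∧ val < 2 ^ 64 := by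
    intro hne
    have hr : 0 ≤ argInt x ∧ argInt x < Codebook.entries g.e.mem (clsBook g) := by
      rcases res with h | h
      · exact absurd h hne
      · exact h
    have hqE : (argInt x).toNat < Residue.E v.mem g.f g.r := by
      rw [c.reads.E]
      show (argInt x).toNat < (Codebook.entries g.e.mem (clsBook g)).toNat
      omega
    have hq : argInt x = (((argInt x).toNat : Nat) : Int) := by omega
    have hres := c.resAt hent
    have hsite := hres.site_classdata hL hqE (a := cd + 8 * (argInt x).toNat) (by rw [hcd])
    have hwb := where_blk hent hres.R8a
    simp only [] at hwb
    refine ⟨(argInt x).toNat, _, el8_addr x cd _ hq, hsite, ?_, rfl, ?_, ?_⟩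
    · rw [hcd]
      omega
    · have := RowPtr.of_row v.mem g.f g.r hqE
      rw [hcd]
      exact this
    · have := Mem.readLE_lt' v.mem (addr (cd + 8 * (argInt x).toNat)) 8
      omega
  u_walk hcode [hμ.vendor] until [Vorbis.L.decode_residue.cut28, Vorbis.L.decode_residue.cut39] span [Vorbis.L.textLo, Vorbis.L.textHi] side (v_side)
  case check_10f752 =>
    -- r->classdata (R2, P1)
    have hun : ShadowUntouched v.mem s_10f752.mem := by v_untouched
    have hres : ResidueOK g.Blk v.mem g.f := c.point.vorbis.residue
    have hs := hres.site_record hL (c.rn_lt hent) 16 8 (by simp only [voff]; omega) (by omega) rfl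
    rw [c.config_at] at hs
    exact Vorbis.Spec.check_site c.shadow hun hs (by u_omega)
  case check_10f777 =>
    -- part_classdata[j], j < ch ≤ C (TB)
    have hun : ShadowUntouched v.mem s_10f777.mem := by v_untouched
    have hs := c.tb.site_rowptr hTB hjC rfl
    rw [erow]
    exact Vorbis.Spec.check_site c.shadow hun hs (toNat_addr _ (by omega))
  case check_10f78d =>
    -- r->classdata[temp], 0 ≤ temp < entries (R8a; the −1 test came first)
    have hun : ShadowUntouched v.mem s_10f78d.mem := by v_untouched
    obtain ⟨q, val, hxa, hsite, hwq, hval, hrp, hvlt⟩ := hK (ne_m1 x hbr_10f741)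
    rw [hxa]
    exact Vorbis.Spec.check_site c.shadow hun hsite (toNat_addr _ (by omega))
  case check_10f798 =>
    -- part_classdata[j][class_set], class_set < part_read (WB)
    have hun : ShadowUntouched v.mem s_10f798.mem := by v_untouched
    have hs := c.tb.site_slot hTB hjC hcsP (a := slot g.TB g.C g.PRD j cs) (by rw [c.tb.rows j hjC]; rfl)
    rw [hslot]
    exact Vorbis.Spec.check_site c.shadow hun hs (toNat_addr _ (by omega))
  case side_code =>
    rw [hslot, toNat_addr _ (by omega)]
    have e : (1154368 : Nat) = 0x119d40 := by decide
    omega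
  · -- 0x10f741 `je` taken: temp = EOP, the trampoline (cut39)
    refine ReachVia.done (Or.inl (Or.inr ?_))
    have hs : Mem.SameExcept (scratch g) v.mem s_10f741.mem := by
      rw [w_mem]
      exact Mem.SameExcept.refl _ _
    have hcore : LoopCore u₀ g cs pcount j s_10f741 := by
      refine core_scratch hent core ?_ ?_ w_eq (by v_inv) ?_ ?_ hs ?_
      · rw [w_kept.get .rbp rfl]
        exact h_rbp
      · rw [w_kept.get .rsp rfl]
        exact h_rsp
      · rw [w_kept.get .r12 rfl]
        exact core.r12
      · rw [w_kept.get .r15 rfl]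
        exact h_r15
      · intro j'' h1 h2
        omega
    exact ⟨by rw [w_rip]; rfl, hcore.common, hcore.path.sl_tap⟩
  · -- the store `part_classdata[j][class_set] = r->classdata[temp]`, the latch, the head with j + 1
    refine ReachVia.done (Or.inr ?_)
    obtain ⟨q, val, hxa, hsite, hwq, hval, hrp, hvlt⟩ := hK (ne_m1 x hbr_10f741)
    have hAn : (addr (cd + 8 * q)).toNat = cd + 8 * q := toNat_addr _ (by omega)
    have hrd : ∀ y, (v.mem.writeLE (g.e.reg .rsp - 256) 8 y).readLE (addr (cd + 8 * q)) 8 = val := by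
      intro y
      u_read
    rw [hxa, hrd, hslot] at w_mem
    have ev : (UInt64.ofNat val).toNat = val := by
      rw [UInt64.toNat_ofNat']
      exact Nat.mod_eq_of_lt hvlt
    rw [ev] at w_mem
    have hs1 : Mem.SameExcept (scratch g) v.mem (v.mem.writeLE (g.e.reg .rsp - 256) 8 1111965) := by
      rw [scratch_def]
      u_same
    refine ⟨by rw [w_rip], ?_, by have := body.j_lt; omega⟩
    refine core_store hent core body.row hs1 ?_ w_rsp w_eq (by v_inv) ?_ ?_ val hvlt ?_ w_mem
    · rw [w_kept.get .rbp rfl]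
      exact h_rbp
    · rw [w_kept.get .r12 rfl]
      exact core.r12
    · rw [w_r15, part32_ofNat j (by omega)]
      exact inc_small j hj31
    · -- row pointers stay row pointers over the push of a return address
      have c1 : Common u₀ g (v.setMem (v.mem.writeLE (g.e.reg .rsp - 256) 8 1111965)) :=
        common_scratch hent c c.rbp c.rsp
          ((show Mem.EqOn L.textLo L.textHi u₀.mem v.mem from c.code).trans
            (hs1.eqOn _ _ (scratch_off hent _ _ (by decide)))) c.inv hs1
      apply hrp.frame (reads_between c c1)
      have hB : g.Blk ⟨Residue.classdata v.mem g.r, 8 * Residue.E v.mem g.f g.r⟩ := (c.resAt hent).R8a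
      have hwb := where_blk hent hB
      simp only [] at hwb
      apply Block.Kept.of_sameExcept hs1
      · exact scratch_off hent _ _ (by simp only []; omega)
      · simp only []
        omega

end Vorbis.Spec.decode_residue_9
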